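-- pv_equiv track=rewrite | github.com/XT60/Matrix-Algorithms | zad4/permutation_engine.py | _minimum_degree_permutation
-- ===== SOURCE A (Python) =====
-- def _minimum_degree_permutation(matrix):
--     # Initialisation
--     n = len(matrix)
--     permutation = []
--     G = {i:set() for i in range(n)}
--
--     for i in range(n):
--         for j in range(n):
--             if matrix[i][j] != 0 and i != j:
--                 G[i].add(j)
--
--     # Algorithm
--     for i in range(n):
--         min_degree = n+1
--         for v, adj in G.items():
--             if len(adj) < min_degree:
--                 p = v
--                 min_degree = len(adj)
--         for v in G:
--             G[v] = G[v].difference([p])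
--         for u in G[p]:
--             G[u] = (G[u].union(G[p].difference([u])))
--         G.pop(p)
--         permutation.append(p)
--
--
--     return permutation
-- ===== SOURCE B (Python) =====
-- def _pq_insert(pq, item):
--     # ordered insert: binary search for the first position whose entry is >= item
--     lo, hi = 0, len(pq)
--     while lo < hi:
--         mid = (lo + hi) // 2
--         if pq[mid] < item:
--             lo = mid + 1
--         else:
--             hi = mid
--     pq.insert(lo, item)
--
--
-- def _minimum_degree_permutation(matrix):
--     # Lazy-deletion priority queue keyed (degree, vertex): selection pops the
--     # queue front and skips stale entries; eliminating p updates only p's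
--     # neighbours.  radj holds the ORIGINAL in-neighbours; fill-in edges are
--     # symmetric, so every current in-neighbour of p lies in radj[p] | adj[p]
--     # and radj never needs updating.  The queue is compacted by filtering
--     # when stale entries outnumber live vertices.
--     n = len(matrix)
--     adj = [set() for _ in range(n)]
--     radj = [set() for _ in range(n)]
--     for i in range(n):
--         row = matrix[i]
--         for j in range(n):
--             if row[j] != 0 and i != j:
--                 adj[i].add(j)
--                 radj[j].add(i)
--     pq = []
--     for v in range(n):
--         _pq_insert(pq, (len(adj[v]), v))
--     alive = [True] * n
--     permutation = []
--     for k in range(n):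
--         while True:
--             d, p = pq.pop(0)
--             if alive[p] and d == len(adj[p]):
--                 break
--         alive[p] = False
--         for v in radj[p] | adj[p]:
--             if alive[v] and p in adj[v]:
--                 adj[v].discard(p)
--                 _pq_insert(pq, (len(adj[v]), v))
--         nbrs = adj[p]
--         for u in nbrs:
--             adj[u] |= nbrs
--             adj[u].discard(u)
--         for u in nbrs:
--             _pq_insert(pq, (len(adj[u]), u))
--         permutation.append(p)
--         if len(pq) > 2 * (n - 1 - k):
--             pq = [e for e in pq if alive[e[1]] and e[0] == len(adj[e[1]])]
--     return permutation
-- ===== Notes on version B (the rewrite author's own statement) =====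
-- stated objective: alternative
-- what changed: Replaces A's per-step full rebuild of every adjacency set and full min-degree scan by a lazy-deletion priority queue keyed (degree, vertex) -- selection pops the sorted queue front skipping stale entries, eliminating p pushes updated entries only for p's in/out-neighbours (adjacency + reverse-adjacency arrays), and the queue is compacted when stale entries outnumber live vertices.
import Mathlib
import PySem

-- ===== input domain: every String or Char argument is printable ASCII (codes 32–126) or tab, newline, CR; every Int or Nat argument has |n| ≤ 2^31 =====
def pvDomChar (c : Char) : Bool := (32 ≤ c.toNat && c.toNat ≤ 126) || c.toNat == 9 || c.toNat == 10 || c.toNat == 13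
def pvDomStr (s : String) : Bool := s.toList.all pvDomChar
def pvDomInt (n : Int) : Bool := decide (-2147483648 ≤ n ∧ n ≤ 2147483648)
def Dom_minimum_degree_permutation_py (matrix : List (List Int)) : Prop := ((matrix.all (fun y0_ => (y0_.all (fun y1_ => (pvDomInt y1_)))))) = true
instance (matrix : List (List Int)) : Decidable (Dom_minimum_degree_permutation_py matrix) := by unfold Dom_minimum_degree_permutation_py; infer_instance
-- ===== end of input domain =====

-- B replaces A's per-elimination full rebuild and full min-degree scan by a lazy-deletion
-- priority queue keyed (degree, vertex) with local degree updates of the eliminated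
-- vertex's neighbours (a genuinely different algorithm; no speed is claimed).

-- ===== PORT A =====
-- one iteration of A's main loop (the loop body over `i in range(n)`; state = (G, permutation))
def pvA_step (n : Int) (st : PySem.Dict Int (PySem.Set Int) × List Int) (_i : Int) :
    PySem.Dict Int (PySem.Set Int) × List Int :=
  let G := st.1
  -- Python's `p` is unassigned before the scan; the first item always assigns it
  -- (every degree is < n+1), so the dummy initial value -1 is never kept.
  let sel := G.items.foldl (fun (acc : Int × Int) vadj =>
      if PySem.Set.len vadj.2 < acc.2 then (vadj.1, PySem.Set.len vadj.2) else acc) (-1, n + 1)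
  let p := sel.1
  let G1 := G.keys.foldl (fun G' v => G'.insert v (PySem.Set.diff (G'.getD v []) [p])) G
  let G2 := (G1.getD p []).foldl (fun G' u =>
      G'.insert u (PySem.Set.union (G'.getD u []) (PySem.Set.diff (G'.getD p []) [u]))) G1
  (G2.erase p, st.2 ++ [p])

def minimum_degree_permutation_py (matrix : List (List Int)) : List Int :=
  let n : Int := matrix.length
  let G0 : PySem.Dict Int (PySem.Set Int) :=
    PySem.Dict.ofList ((PySem.List.pyRange 0 n 1).map (fun i => (i, PySem.Set.empty)))
  let G := (PySem.List.pyRange 0 n 1).foldl (fun G i =>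
      (PySem.List.pyRange 0 n 1).foldl (fun G j =>
        if PySem.List.pyGetD (PySem.List.pyGetD matrix i []) j 0 ≠ 0 ∧ i ≠ j
        then PySem.Dict.insert G i (PySem.Set.add (G.getD i []) j) else G) G) G0
  ((PySem.List.pyRange 0 n 1).foldl (pvA_step n) (G, [])).2

-- ===== PORT B =====
-- Python tuple comparison '<' on (degree, vertex) pairs
def pvLtP (a b : Int × Int) : Bool := a.1 < b.1 || (a.1 == b.1 && a.2 < b.2)

-- _pq_insert: ordered insert (the binary search locates the first entry ≥ item;
-- list.insert places item there, i.e. before the first entry not < item)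
def pvInsert (pq : List (Int × Int)) (item : Int × Int) : List (Int × Int) :=
  match pq with
  | [] => [item]
  | e :: rest => if pvLtP e item then e :: pvInsert rest item else item :: e :: rest

-- the `while True: pq.pop(0) …` loop: skip stale entries until a valid one is found;
-- the [] case is unreachable (Python would raise IndexError): under the queue invariant
-- every live vertex keeps a valid entry in pq
def pvPopQ (adj : List (PySem.Set Int)) (alive : List Bool) : List (Int × Int) → Int × List (Int × Int)
  | [] => (-1, [])
  | (d, v) :: rest =>
    if PySem.List.pyGetD alive v false = true ∧ d = PySem.Set.len (PySem.List.pyGetD adj v [])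
    then (v, rest) else pvPopQ adj alive rest

-- one iteration of B's main loop; state = (pq, adj, radj, alive, permutation); k = loop index
def pvB_step (n : Int) (st : List (Int × Int) × List (PySem.Set Int) × List (PySem.Set Int) × List Bool × List Int) (k : Int) :
    List (Int × Int) × List (PySem.Set Int) × List (PySem.Set Int) × List Bool × List Int :=
  let pq := st.1
  let adj := st.2.1
  let radj := st.2.2.1
  let alive := st.2.2.2.1
  let pr := pvPopQ adj alive pq
  let p := pr.1
  let alive1 := PySem.List.pySetD alive p false
  let s1 := (PySem.Set.union (PySem.List.pyGetD radj p []) (PySem.List.pyGetD adj p [])).foldl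
      (fun (aq : List (PySem.Set Int) × List (Int × Int)) v =>
        if PySem.List.pyGetD alive1 v false && (PySem.List.pyGetD aq.1 v []).contains p
        then (PySem.List.pySetD aq.1 v (PySem.Set.discard (PySem.List.pyGetD aq.1 v []) p),
              pvInsert aq.2 (PySem.Set.len (PySem.Set.discard (PySem.List.pyGetD aq.1 v []) p), v))
        else aq) (adj, pr.2)
  let nbrs := PySem.List.pyGetD s1.1 p []
  let upd := nbrs.foldl (fun a u =>
      PySem.List.pySetD a u (PySem.Set.discard (PySem.Set.union (PySem.List.pyGetD a u []) nbrs) u)) s1.1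
  let pq2 := nbrs.foldl (fun q u => pvInsert q (PySem.Set.len (PySem.List.pyGetD upd u []), u)) s1.2
  let pq3 := if 2 * (n - 1 - k) < (pq2.length : Int)
      then pq2.filter (fun e => PySem.List.pyGetD alive1 e.2 false
              && (e.1 == PySem.Set.len (PySem.List.pyGetD upd e.2 [])))
      else pq2
  (pq3, upd, radj, alive1, st.2.2.2.2 ++ [p])

def minimum_degree_permutation_py_alt (matrix : List (List Int)) : List Int :=
  let n : Int := matrix.length
  let init : List (PySem.Set Int) := (PySem.List.pyRange 0 n 1).map (fun _ => PySem.Set.empty)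
  let built := (PySem.List.pyRange 0 n 1).foldl
      (fun (ar : List (PySem.Set Int) × List (PySem.Set Int)) i =>
        let row := PySem.List.pyGetD matrix i []
        (PySem.List.pyRange 0 n 1).foldl
          (fun (ar : List (PySem.Set Int) × List (PySem.Set Int)) j =>
            if PySem.List.pyGetD row j 0 ≠ 0 ∧ i ≠ j
            then (PySem.List.pySetD ar.1 i (PySem.Set.add (PySem.List.pyGetD ar.1 i []) j),
                  PySem.List.pySetD ar.2 j (PySem.Set.add (PySem.List.pyGetD ar.2 j []) i))
            else ar) ar) (init, init)
  let pq0 := (PySem.List.pyRange 0 n 1).foldl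
      (fun q v => pvInsert q (PySem.Set.len (PySem.List.pyGetD built.1 v []), v)) []
  let alive0 : List Bool := List.replicate matrix.length true
  ((PySem.List.pyRange 0 n 1).foldl (pvB_step n) (pq0, built.1, built.2, alive0, [])).2.2.2.2

-- ===== PRECONDITION & SPEC =====
-- Pre_ excludes exactly the inputs where Python raises IndexError (both A and B index
-- matrix[i][j] for all i, j < len(matrix)): some row shorter than the matrix.
def Pre_minimum_degree_permutation_py (matrix : List (List Int)) : Prop :=
  ∀ row ∈ matrix, matrix.length ≤ row.length
instance (matrix : List (List Int)) : Decidable (Pre_minimum_degree_permutation_py matrix) := by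
  unfold Pre_minimum_degree_permutation_py; infer_instance
def pvWitness_minimum_degree_permutation_py : List (List Int) := [[0, 1], [1, 0]]
def Spec_minimum_degree_permutation_py (matrix : List (List Int)) (out : List Int) : Prop := out = minimum_degree_permutation_py_alt matrix
instance (matrix : List (List Int)) (out : List Int) : Decidable (Spec_minimum_degree_permutation_py matrix out) := by unfold Spec_minimum_degree_permutation_py; infer_instance

-- ===== CLAIM (what is proved, stated in full; the proofs are below) =====
def Claim_equal_minimum_degree_permutation_py : Prop := ∀ (matrix : List (List Int)), Dom_minimum_degree_permutation_py matrix → Pre_minimum_degree_permutation_py matrix → Spec_minimum_degree_permutation_py matrix (minimum_degree_permutation_py matrix)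

-- ===== LEMMAS AND PROOFS =====

-- the value stored at index v of an array of sets (all reads happen at 0 ≤ v < length)
def pvCell {α : Type} (a : List (List α)) (v : Int) : List α := PySem.List.pyGetD a v []
-- the list of still-live vertices, in increasing order (= the dict's key order in A)
def pvAliveL (n : Int) (alive : List Bool) : List Int :=
  (PySem.List.pyRange 0 n 1).filter (fun v => PySem.List.pyGetD alive v false)

-- the simulation invariant between A's dict-of-sets and B's (adj, radj, alive) arrays
structure pvInv (n : Int) (G : PySem.Dict Int (PySem.Set Int))
    (adj radj : List (PySem.Set Int)) (alive : List Bool) : Prop where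
  la : (adj.length : Int) = n
  lr : (radj.length : Int) = n
  lv : (alive.length : Int) = n
  items : G.items = (pvAliveL n alive).map (fun v => (v, pvCell adj v))
  nd : ∀ v : Int, 0 ≤ v → v < n → (pvCell adj v).Nodup
  mem : ∀ v ∈ pvAliveL n alive, ∀ w ∈ pvCell adj v, w ∈ pvAliveL n alive ∧ w ≠ v
  sup : ∀ v ∈ pvAliveL n alive, ∀ q, q ∈ pvCell adj v → v ∈ pvCell radj q ∨ v ∈ pvCell adj q
  rrange : ∀ q : Int, 0 ≤ q → q < n → ∀ v ∈ pvCell radj q, 0 ≤ v ∧ v < n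
  rnd : ∀ q : Int, 0 ≤ q → q < n → (pvCell radj q).Nodup
  rirr : ∀ q : Int, 0 ≤ q → q < n → q ∉ pvCell radj q

-- the priority-queue invariant for B: sorted, one valid entry per live vertex,
-- every entry's vertex in range
def pvLeP (a b : Int × Int) : Prop := pvLtP b a = false

structure pvQInv (n : Int) (adj : List (PySem.Set Int)) (alive : List Bool)
    (pq : List (Int × Int)) : Prop where
  sorted : List.Pairwise pvLeP pq
  mem : ∀ v ∈ pvAliveL n alive, (PySem.Set.len (pvCell adj v), v) ∈ pq
  range : ∀ e ∈ pq, 0 ≤ e.2 ∧ e.2 < n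

-- generic: two folds over the same list preserve a relation
theorem pv_foldl_rel {α β γ : Type} (R : α → β → Prop) (f : α → γ → α) (g : β → γ → β) :
    ∀ (l : List γ) (a : α) (b : β), R a b →
      (∀ a b x, x ∈ l → R a b → R (f a x) (g b x)) →
      R (l.foldl f a) (l.foldl g b) := by
  intro l
  induction l with
  | nil => intro a b h _; exact h
  | cons x xs ih =>
    intro a b h hstep
    exact ih _ _ (hstep a b x (by simp) h)
      (fun a b y hy => hstep a b y (by simp [hy]))

theorem pv_getD_set {α : Type} (a : List α) (d : α) (v : Int) (S : α)
    (h0 : 0 ≤ v) (w : Int) (hw0 : 0 ≤ w) (hw1 : w < (a.length : Int)) :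
    PySem.List.pyGetD (PySem.List.pySetD a v S) w d = if w = v then S else PySem.List.pyGetD a w d := by
  rw [PySem.List.pySetD_of_nonneg a S h0,
      PySem.List.pyGetD_eq_getElem _ _ hw0 (by simpa using hw1),
      List.getElem_set]
  by_cases h : w = v
  · subst h; rw [if_pos (by omega), if_pos rfl]
  · rw [if_neg (by omega), if_neg h, PySem.List.pyGetD_eq_getElem _ _ hw0 hw1]

theorem pv_cell_set (a : List (PySem.Set Int)) (v : Int) (S : PySem.Set Int)
    (h0 : 0 ≤ v) (w : Int) (hw0 : 0 ≤ w) (hw1 : w < (a.length : Int)) :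
    pvCell (PySem.List.pySetD a v S) w = if w = v then S else pvCell a w :=
  pv_getD_set a [] v S h0 w hw0 hw1

theorem pv_foldB (f : Int → PySem.Set Int → PySem.Set Int) :
    ∀ (us : List Int) (a : List (PySem.Set Int)), us.Nodup →
      (∀ v ∈ us, 0 ≤ v) →
      ((us.foldl (fun a v => PySem.List.pySetD a v (f v (PySem.List.pyGetD a v []))) a).length = a.length ∧
       ∀ w : Int, 0 ≤ w → w < (a.length : Int) →
         pvCell (us.foldl (fun a v => PySem.List.pySetD a v (f v (PySem.List.pyGetD a v []))) a) w
           = if w ∈ us then f w (pvCell a w) else pvCell a w) := by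
  intro us
  induction us with
  | nil => intro a _ _; exact ⟨rfl, fun w _ _ => by simp⟩
  | cons v us ih =>
    intro a hnd hnn
    have hv0 : 0 ≤ v := hnn v (by simp)
    have hlen1 : (PySem.List.pySetD a v (f v (PySem.List.pyGetD a v []))).length = a.length := by
      simp [PySem.List.length_pySetD]
    obtain ⟨ihl, ihc⟩ := ih (PySem.List.pySetD a v (f v (PySem.List.pyGetD a v [])))
      (by exact hnd.of_cons) (fun u hu => hnn u (by simp [hu]))
    constructor
    · simpa [hlen1] using ihl
    · intro w hw0 hw1
      have hvnot : v ∉ us := by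
        have := hnd; rw [List.nodup_cons] at this; exact this.1
      rw [List.foldl_cons, ihc w hw0 (by rw [hlen1]; exact hw1),
          pv_cell_set a v _ hv0 w hw0 hw1]
      by_cases hwus : w ∈ us
      · have hwv : w ≠ v := fun h => hvnot (h ▸ hwus)
        simp [hwus, hwv]
      · by_cases hwv : w = v
        · subst hwv; simp [hwus, pvCell]
        · simp [hwus, hwv]

theorem pv_dict_getD (L : List Int) (h : Int → PySem.Set Int) (w : Int) :
    (PySem.Dict.mk (L.map (fun v => (v, h v)))).getD w [] = if w ∈ L then h w else [] := by
  induction L with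
  | nil => simp [PySem.Dict.getD, PySem.Dict.get?]
  | cons x L ih =>
    by_cases hxw : x = w
    · subst hxw
      simp [PySem.Dict.getD, PySem.Dict.get?, List.find?_cons_of_pos]
    · simp only [List.map_cons]
      rw [show (PySem.Dict.mk ((x, h x) :: L.map (fun v => (v, h v)))).getD w []
            = (PySem.Dict.mk (L.map (fun v => (v, h v)))).getD w [] from by
        simp [PySem.Dict.getD, PySem.Dict.get?_mk_cons, hxw]]
      rw [ih]
      simp [List.mem_cons, Ne.symm hxw]

theorem pv_insert_existing (l : List (Int × PySem.Set Int)) (u : Int) (S : PySem.Set Int)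
    (hu : u ∈ l.map Prod.fst) :
    (PySem.Dict.mk l).insert u S = PySem.Dict.mk (l.map (fun kv => if kv.1 = u then (u, S) else kv)) := by
  have hc : (PySem.Dict.mk l).contains u = true := by
    obtain ⟨kv, hmem, hfst⟩ := List.mem_map.mp hu
    simp only [PySem.Dict.contains, List.any_eq_true]
    exact ⟨kv, hmem, by simp [hfst]⟩
  simp only [PySem.Dict.insert, hc, if_pos]
  congr 1
  apply List.map_congr_left
  intro kv _
  by_cases hk : kv.1 = u <;> simp [hk]

theorem pv_dict_fold0 (f : Int → PySem.Set Int → PySem.Set Int) :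
    ∀ (us : List Int) (L : List Int) (h : Int → PySem.Set Int), us.Nodup → (∀ u ∈ us, u ∈ L) →
      us.foldl (fun d u => d.insert u (f u (d.getD u []))) (PySem.Dict.mk (L.map (fun v => (v, h v)))) =
      PySem.Dict.mk (L.map (fun v => (v, if v ∈ us then f v (h v) else h v))) := by
  intro us
  induction us with
  | nil => intro L h _ _; simp
  | cons u us ih =>
    intro L h hnd hsub
    have hu : u ∈ L := hsub u (by simp)
    have hunot : u ∉ us := by rw [List.nodup_cons] at hnd; exact hnd.1
    rw [List.foldl_cons, pv_dict_getD L h u, if_pos hu,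
        pv_insert_existing _ u _ (by simpa [List.map_map, Function.comp] using hu)]
    rw [List.map_map]
    rw [show L.map ((fun kv => if kv.1 = u then (u, f u (h u)) else kv) ∘ fun v => (v, h v))
          = L.map (fun v => (v, if v = u then f u (h u) else h v)) from by
      apply List.map_congr_left; intro v _
      by_cases hv : v = u <;> simp [hv]]
    rw [ih L _ hnd.of_cons (fun x hx => hsub x (by simp [hx]))]
    congr 1
    apply List.map_congr_left
    intro v _
    by_cases hv : v = u
    · subst hv; simp [hunot]
    · simp [hv, List.mem_cons]

theorem pv_dict_foldq (f : Int → PySem.Set Int → PySem.Set Int → PySem.Set Int) (q : Int) :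
    ∀ (us : List Int) (L : List Int) (h : Int → PySem.Set Int), us.Nodup → (∀ u ∈ us, u ∈ L) →
      q ∉ us →
      us.foldl (fun d u => d.insert u (f u (d.getD u []) (d.getD q []))) (PySem.Dict.mk (L.map (fun v => (v, h v)))) =
      PySem.Dict.mk (L.map (fun v => (v, if v ∈ us then f v (h v) (if q ∈ L then h q else []) else h v))) := by
  intro us
  induction us with
  | nil => intro L h _ _ _; simp
  | cons u us ih =>
    intro L h hnd hsub hq
    have hu : u ∈ L := hsub u (by simp)
    have hunot : u ∉ us := by rw [List.nodup_cons] at hnd; exact hnd.1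
    have hqu : q ≠ u := fun hqe => hq (by simp [hqe])
    rw [List.foldl_cons, pv_dict_getD L h u, if_pos hu, pv_dict_getD L h q,
        pv_insert_existing _ u _ (by simpa [List.map_map, Function.comp] using hu)]
    rw [List.map_map]
    rw [show L.map ((fun kv => if kv.1 = u then (u, f u (h u) (if q ∈ L then h q else [])) else kv) ∘ fun v => (v, h v))
          = L.map (fun v => (v, if v = u then f u (h u) (if q ∈ L then h q else []) else h v)) from by
      apply List.map_congr_left; intro v _
      by_cases hv : v = u <;> simp [hv]]
    rw [ih L _ hnd.of_cons (fun x hx => hsub x (by simp [hx])) (fun hx => hq (by simp [hx]))]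
    have hqsame : (if q = u then f u (h u) (if q ∈ L then h q else []) else h q) = h q := by
      simp [hqu]
    congr 1
    apply List.map_congr_left
    intro v _
    by_cases hv : v = u
    · subst hv; simp [hunot]
    · simp [hv, List.mem_cons, hqsame]

theorem pv_union_eq (t s : List Int) (ht : t.Nodup) :
    PySem.Set.union s t = s ++ t.filter (fun x => !s.contains x) := by
  induction t generalizing s with
  | nil => simp [PySem.Set.union, PySem.Set.update]
  | cons x t ih =>
    have hx : x ∉ t := (List.nodup_cons.mp ht).1
    have ht' : t.Nodup := (List.nodup_cons.mp ht).2
    have hstep : PySem.Set.union s (x :: t) = PySem.Set.union (PySem.Set.add s x) t := by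
      simp [PySem.Set.union, PySem.Set.update]
    rw [hstep, ih _ ht']
    by_cases hc : s.contains x = true
    · have hxm : x ∈ s := by simpa [List.contains_eq_mem] using hc
      have hadd : PySem.Set.add s x = s := by simp [PySem.Set.add, List.contains_eq_mem, hxm]
      rw [hadd, List.filter_cons_of_neg (by simp [List.contains_eq_mem, hxm])]
    · have hxm : x ∉ s := by simpa [List.contains_eq_mem] using hc
      have hadd : PySem.Set.add s x = s ++ [x] := by simp [PySem.Set.add, List.contains_eq_mem, hxm]
      rw [hadd, List.filter_cons_of_pos (by simp [List.contains_eq_mem, hxm])]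
      rw [List.append_assoc, List.singleton_append]
      congr 2
      apply List.filter_congr
      intro y hy
      have hyx : ¬ (y = x) := fun h => hx (h ▸ hy)
      simp [List.contains_eq_mem, hyx]

theorem pv_mem_union (s t : List Int) (x : Int) :
    x ∈ PySem.Set.union s t ↔ x ∈ s ∨ x ∈ t := by
  induction t generalizing s with
  | nil => simp [PySem.Set.union, PySem.Set.update]
  | cons y t ih =>
    have hstep : PySem.Set.union s (y :: t) = PySem.Set.union (PySem.Set.add s y) t := by
      simp [PySem.Set.union, PySem.Set.update]
    rw [hstep, ih, PySem.Set.mem_add]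
    simp [List.mem_cons]
    tauto

theorem pv_union_nodup (s t : List Int) (hs : s.Nodup) (ht : t.Nodup) :
    (PySem.Set.union s t).Nodup := by
  induction t generalizing s with
  | nil => simpa [PySem.Set.union, PySem.Set.update] using hs
  | cons y t ih =>
    have hstep : PySem.Set.union s (y :: t) = PySem.Set.union (PySem.Set.add s y) t := by
      simp [PySem.Set.union, PySem.Set.update]
    rw [hstep]
    refine ih _ ?_ (List.nodup_cons.mp ht).2
    by_cases hc : s.contains y = true
    · have hym : y ∈ s := by simpa [List.contains_eq_mem] using hc
      simpa [PySem.Set.add, List.contains_eq_mem, hym] using hs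
    · have hy : y ∉ s := by simpa [List.contains_eq_mem] using hc
      simp [PySem.Set.add, List.contains_eq_mem, hy, List.nodup_append, hs]
      exact fun a ha hay => hy (hay ▸ ha)

theorem pv_union_discard (s t : List Int) (v : Int) (hv : v ∉ s) (ht : t.Nodup) :
    PySem.Set.union s (PySem.Set.diff t [v]) = PySem.Set.discard (PySem.Set.union s t) v := by
  have hd : (PySem.Set.diff t [v]).Nodup := List.Nodup.filter _ ht
  rw [PySem.Set.discard, pv_union_eq _ _ ht, pv_union_eq _ _ hd]
  rw [List.filter_append]
  rw [show List.filter (fun y => !(y == v)) s = s from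
    List.filter_eq_self.mpr (fun x hxs => by
      have : ¬ (x = v) := fun h => hv (h ▸ hxs)
      simp [this])]
  congr 1
  rw [PySem.Set.diff, List.filter_filter, List.filter_filter]
  apply List.filter_congr
  intro y _
  by_cases h1 : y ∈ s <;> by_cases h2 : y = v <;> simp [List.contains_eq_mem, h1, h2]

-- ===== order lemmas for (degree, vertex) pairs =====
theorem pv_lt_iff (a b : Int × Int) : pvLtP a b = true ↔ (a.1 < b.1 ∨ (a.1 = b.1 ∧ a.2 < b.2)) := by
  simp [pvLtP]

theorem pv_le_iff (a b : Int × Int) : pvLeP a b ↔ (a.1 < b.1 ∨ (a.1 = b.1 ∧ a.2 ≤ b.2)) := by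
  unfold pvLeP
  rw [Bool.eq_false_iff, Ne, pv_lt_iff]
  omega

theorem pv_le_trans (a b c : Int × Int) : pvLeP a b → pvLeP b c → pvLeP a c := by
  rw [pv_le_iff, pv_le_iff, pv_le_iff]; omega

theorem pv_le_of_lt (a b : Int × Int) : pvLtP a b = true → pvLeP a b := by
  rw [pv_lt_iff, pv_le_iff]; omega

theorem pv_le_of_not_lt (a b : Int × Int) : ¬ pvLtP a b = true → pvLeP b a := by
  rw [pv_lt_iff, pv_le_iff]; omega

theorem pv_absurd (a b : Int × Int) : pvLeP a b → pvLtP b a = true → False := by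
  rw [pv_le_iff, pv_lt_iff]; omega


-- ===== pvInsert lemmas =====
theorem pv_mem_insert : ∀ (q : List (Int × Int)) (x e : Int × Int),
    e ∈ pvInsert q x ↔ e = x ∨ e ∈ q := by
  intro q
  induction q with
  | nil => intro x e; simp [pvInsert]
  | cons h t ih =>
    intro x e
    by_cases hc : pvLtP h x = true
    · simp only [pvInsert, if_pos hc, List.mem_cons, ih]
      tauto
    · simp only [pvInsert, if_neg hc, List.mem_cons]

theorem pv_insert_sorted : ∀ (q : List (Int × Int)) (x : Int × Int),
    List.Pairwise pvLeP q → List.Pairwise pvLeP (pvInsert q x) := by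
  intro q
  induction q with
  | nil => intro x _; simp [pvInsert]
  | cons h t ih =>
    intro x hs
    rw [List.pairwise_cons] at hs
    obtain ⟨hh, ht⟩ := hs
    by_cases hc : pvLtP h x = true
    · simp only [pvInsert, if_pos hc]
      rw [List.pairwise_cons]
      refine ⟨?_, ih x ht⟩
      intro e he
      rcases (pv_mem_insert t x e).mp he with rfl | h'
      · exact pv_le_of_lt _ _ hc
      · exact hh _ h'
    · simp only [pvInsert, if_neg hc]
      rw [List.pairwise_cons]
      refine ⟨?_, List.pairwise_cons.mpr ⟨hh, ht⟩⟩
      intro e he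
      rcases List.mem_cons.mp he with rfl | h'
      · exact pv_le_of_not_lt _ _ hc
      · exact pv_le_trans x h e (pv_le_of_not_lt _ _ hc) (hh _ h')

-- ===== fold-of-inserts lemmas (the initial queue build and the fill-in pushes) =====
theorem pv_foldI_mono (f : Int → Int × Int) :
    ∀ (us : List Int) (q : List (Int × Int)) (e : Int × Int), e ∈ q →
      e ∈ us.foldl (fun q u => pvInsert q (f u)) q := by
  intro us
  induction us with
  | nil => intro q e he; exact he
  | cons u us ih =>
    intro q e he
    exact ih _ _ ((pv_mem_insert q (f u) e).mpr (Or.inr he))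

theorem pv_foldI_mem (f : Int → Int × Int) :
    ∀ (us : List Int) (q : List (Int × Int)) (u : Int), u ∈ us →
      f u ∈ us.foldl (fun q u => pvInsert q (f u)) q := by
  intro us
  induction us with
  | nil => intro q u hu; simp at hu
  | cons u' us ih =>
    intro q u hu
    rcases List.mem_cons.mp hu with rfl | h'
    · exact pv_foldI_mono f us _ _ ((pv_mem_insert q (f u) (f u)).mpr (Or.inl rfl))
    · exact ih _ _ h'

theorem pv_foldI_src (f : Int → Int × Int) :
    ∀ (us : List Int) (q : List (Int × Int)) (e : Int × Int),
      e ∈ us.foldl (fun q u => pvInsert q (f u)) q → e ∈ q ∨ ∃ u ∈ us, e = f u := by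
  intro us
  induction us with
  | nil => intro q e he; exact Or.inl he
  | cons u us ih =>
    intro q e he
    rcases ih _ _ he with h' | ⟨u', hu', he'⟩
    · rcases (pv_mem_insert q (f u) e).mp h' with rfl | h''
      · exact Or.inr ⟨u, by simp, rfl⟩
      · exact Or.inl h''
    · exact Or.inr ⟨u', by simp [hu'], he'⟩

theorem pv_foldI_sorted (f : Int → Int × Int) :
    ∀ (us : List Int) (q : List (Int × Int)), List.Pairwise pvLeP q →
      List.Pairwise pvLeP (us.foldl (fun q u => pvInsert q (f u)) q) := by
  intro us
  induction us with
  | nil => intro q h; exact h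
  | cons u us ih => intro q h; exact ih _ (pv_insert_sorted q (f u) h)

-- ===== the lazy pop: the first valid entry of a sorted queue is the minimum =====
theorem pv_pop (adj : List (PySem.Set Int)) (alive : List Bool) (m : Int × Int)
    (hma : PySem.List.pyGetD alive m.2 false = true)
    (hmd : m.1 = PySem.Set.len (PySem.List.pyGetD adj m.2 [])) :
    ∀ pq : List (Int × Int), List.Pairwise pvLeP pq → m ∈ pq →
    (∀ e ∈ pq, PySem.List.pyGetD alive e.2 false = true →
        e.1 = PySem.Set.len (PySem.List.pyGetD adj e.2 []) → e = m ∨ pvLtP m e = true) →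
    ∃ rest, pvPopQ adj alive pq = (m.2, rest) ∧ List.Pairwise pvLeP rest ∧
      (∀ e ∈ rest, e ∈ pq) ∧
      (∀ e ∈ pq, PySem.List.pyGetD alive e.2 false = true →
        e.1 = PySem.Set.len (PySem.List.pyGetD adj e.2 []) → e ≠ m → e ∈ rest) := by
  intro pq
  induction pq with
  | nil => intro _ hmem _; simp at hmem
  | cons e t ih =>
    intro hsort hmem hmin
    obtain ⟨d, v⟩ := e
    rw [List.pairwise_cons] at hsort
    obtain ⟨hhead, htail⟩ := hsort
    by_cases hval : PySem.List.pyGetD alive v false = true ∧ d = PySem.Set.len (PySem.List.pyGetD adj v [])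
    · have heqm : (d, v) = m := by
        rcases hmin (d, v) (by simp) hval.1 hval.2 with h | h
        · exact h
        · rcases List.mem_cons.mp hmem with h' | h'
          · exact h'.symm
          · exact absurd h (fun hlt => pv_absurd _ _ (hhead m h') hlt)
      refine ⟨t, ?_, htail, fun e he => List.mem_cons_of_mem _ he, ?_⟩
      · simp only [pvPopQ, if_pos hval]
        rw [show v = m.2 from congrArg Prod.snd heqm]
      · intro e he hea hed hne
        rcases List.mem_cons.mp he with rfl | h'
        · exact absurd heqm hne
        · exact h'
    · have hne : m ≠ (d, v) := by
        intro h
        exact hval ⟨by rw [h] at hma; exact hma, by rw [h] at hmd; exact hmd⟩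
      have hmem' : m ∈ t := by
        rcases List.mem_cons.mp hmem with h | h
        · exact absurd h hne
        · exact h
      obtain ⟨rest, heq, hrs, hsub, hret⟩ := ih htail hmem'
        (fun e he hea hed => hmin e (List.mem_cons_of_mem _ he) hea hed)
      refine ⟨rest, ?_, hrs, fun e he => List.mem_cons_of_mem _ (hsub e he), ?_⟩
      · simp only [pvPopQ, if_neg hval]; exact heq
      · intro e he hea hed hnem
        rcases List.mem_cons.mp he with rfl | h'
        · exact absurd ⟨hea, hed⟩ hval
        · exact hret e h' hea hed hnem

-- selection body of A's scan
def pvSel (adj : List (PySem.Set Int)) (acc : Int × Int) (v : Int) : Int × Int :=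
  if PySem.Set.len (PySem.List.pyGetD adj v []) < acc.2
  then (v, PySem.Set.len (PySem.List.pyGetD adj v [])) else acc

-- A's first-strict-improvement scan over an increasing list computes the
-- lexicographic minimum of (degree, vertex)
theorem pv_scan (adj : List (PySem.Set Int)) :
    ∀ (l : List Int) (acc : Int × Int), List.Pairwise (· < ·) l →
      (l.foldl (pvSel adj) acc = acc ∧ ∀ v ∈ l, acc.2 ≤ PySem.Set.len (pvCell adj v)) ∨
      ((l.foldl (pvSel adj) acc).1 ∈ l ∧
       (l.foldl (pvSel adj) acc).2 = PySem.Set.len (pvCell adj (l.foldl (pvSel adj) acc).1) ∧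
       (l.foldl (pvSel adj) acc).2 < acc.2 ∧
       ∀ v ∈ l, (l.foldl (pvSel adj) acc).2 < PySem.Set.len (pvCell adj v) ∨
         (PySem.Set.len (pvCell adj v) = (l.foldl (pvSel adj) acc).2 ∧
          (l.foldl (pvSel adj) acc).1 ≤ v)) := by
  intro l
  induction l with
  | nil => intro acc _; exact Or.inl ⟨rfl, by simp⟩
  | cons x l ih =>
    intro acc hp
    rw [List.pairwise_cons] at hp
    obtain ⟨hx, hl⟩ := hp
    by_cases h : PySem.Set.len (PySem.List.pyGetD adj x []) < acc.2
    · have hsel : pvSel adj acc x = (x, PySem.Set.len (PySem.List.pyGetD adj x [])) := by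
        unfold pvSel; rw [if_pos h]
      rw [List.foldl_cons, hsel]
      rcases ih (x, PySem.Set.len (PySem.List.pyGetD adj x [])) hl with ⟨he, hall⟩ | ⟨h1, h2, h3, h4⟩
      · refine Or.inr ?_
        rw [he]
        refine ⟨by simp, rfl, h, ?_⟩
        intro v hv
        rcases List.mem_cons.mp hv with rfl | hv'
        · exact Or.inr ⟨rfl, le_refl _⟩
        · have := hall v hv'
          by_cases heq : PySem.Set.len (pvCell adj v) = PySem.Set.len (PySem.List.pyGetD adj x [])
          · exact Or.inr ⟨heq, (hx v hv').le⟩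
          · exact Or.inl (by
              have : PySem.Set.len (PySem.List.pyGetD adj x []) ≤ PySem.Set.len (pvCell adj v) := this
              omega)
      · refine Or.inr ⟨List.mem_cons_of_mem _ h1, h2, by omega, ?_⟩
        intro v hv
        rcases List.mem_cons.mp hv with rfl | hv'
        · exact Or.inl (by
            have : (l.foldl (pvSel adj) (v, PySem.Set.len (PySem.List.pyGetD adj v []))).2
                < PySem.Set.len (PySem.List.pyGetD adj v []) := h3
            exact this)
        · exact h4 v hv'
    · have hsel : pvSel adj acc x = acc := by unfold pvSel; rw [if_neg h]
      rw [List.foldl_cons, hsel]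
      rcases ih acc hl with ⟨he, hall⟩ | ⟨h1, h2, h3, h4⟩
      · refine Or.inl ⟨he, ?_⟩
        intro v hv
        rcases List.mem_cons.mp hv with rfl | hv'
        · show acc.2 ≤ PySem.Set.len (PySem.List.pyGetD adj v []); omega
        · exact hall v hv'
      · refine Or.inr ⟨List.mem_cons_of_mem _ h1, h2, h3, ?_⟩
        intro v hv
        rcases List.mem_cons.mp hv with rfl | hv'
        · exact Or.inl (by
            show (l.foldl (pvSel adj) acc).2 < PySem.Set.len (PySem.List.pyGetD adj v []); omega)
        · exact h4 v hv'

-- ===== the conditional discard-and-push fold over radj[p] =====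
theorem pv_foldS (c : Int → List Int → Bool) (f : Int → List Int → List Int)
    (g : Int → List Int → Int × Int) :
    ∀ (us : List Int) (a : List (PySem.Set Int)) (q : List (Int × Int)),
      us.Nodup → (∀ v ∈ us, 0 ≤ v) → (∀ v ∈ us, v < (a.length : Int)) →
      ((us.foldl (fun (aq : List (PySem.Set Int) × List (Int × Int)) v =>
          if c v (PySem.List.pyGetD aq.1 v []) = true
          then (PySem.List.pySetD aq.1 v (f v (PySem.List.pyGetD aq.1 v [])),
                pvInsert aq.2 (g v (f v (PySem.List.pyGetD aq.1 v []))))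
          else aq) (a, q)).1.length = a.length) ∧
      (∀ w : Int, 0 ≤ w → w < (a.length : Int) →
        pvCell (us.foldl (fun (aq : List (PySem.Set Int) × List (Int × Int)) v =>
          if c v (PySem.List.pyGetD aq.1 v []) = true
          then (PySem.List.pySetD aq.1 v (f v (PySem.List.pyGetD aq.1 v [])),
                pvInsert aq.2 (g v (f v (PySem.List.pyGetD aq.1 v []))))
          else aq) (a, q)).1 w
          = if w ∈ us ∧ c w (pvCell a w) = true then f w (pvCell a w) else pvCell a w) ∧
      (∀ e ∈ q, e ∈ (us.foldl (fun (aq : List (PySem.Set Int) × List (Int × Int)) v =>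
          if c v (PySem.List.pyGetD aq.1 v []) = true
          then (PySem.List.pySetD aq.1 v (f v (PySem.List.pyGetD aq.1 v [])),
                pvInsert aq.2 (g v (f v (PySem.List.pyGetD aq.1 v []))))
          else aq) (a, q)).2) ∧
      (∀ w ∈ us, c w (pvCell a w) = true →
        g w (f w (pvCell a w)) ∈ (us.foldl (fun (aq : List (PySem.Set Int) × List (Int × Int)) v =>
          if c v (PySem.List.pyGetD aq.1 v []) = true
          then (PySem.List.pySetD aq.1 v (f v (PySem.List.pyGetD aq.1 v [])),
                pvInsert aq.2 (g v (f v (PySem.List.pyGetD aq.1 v []))))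
          else aq) (a, q)).2) ∧
      (∀ e ∈ (us.foldl (fun (aq : List (PySem.Set Int) × List (Int × Int)) v =>
          if c v (PySem.List.pyGetD aq.1 v []) = true
          then (PySem.List.pySetD aq.1 v (f v (PySem.List.pyGetD aq.1 v [])),
                pvInsert aq.2 (g v (f v (PySem.List.pyGetD aq.1 v []))))
          else aq) (a, q)).2, e ∈ q ∨ ∃ w ∈ us, ∃ s, e = g w s) ∧
      (List.Pairwise pvLeP q → List.Pairwise pvLeP
        ((us.foldl (fun (aq : List (PySem.Set Int) × List (Int × Int)) v =>
          if c v (PySem.List.pyGetD aq.1 v []) = true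
          then (PySem.List.pySetD aq.1 v (f v (PySem.List.pyGetD aq.1 v [])),
                pvInsert aq.2 (g v (f v (PySem.List.pyGetD aq.1 v []))))
          else aq) (a, q)).2)) := by
  intro us
  induction us with
  | nil =>
    intro a q _ _ _
    exact ⟨rfl, fun w _ _ => by simp, fun e he => he, fun w hw => by simp at hw,
      fun e he => Or.inl he, fun h => h⟩
  | cons v us ih =>
    intro a q hnd hnn hbd
    have hv0 : 0 ≤ v := hnn v (by simp)
    have hv1 : v < (a.length : Int) := hbd v (by simp)
    have hvnot : v ∉ us := by rw [List.nodup_cons] at hnd; exact hnd.1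
    rw [List.foldl_cons]
    by_cases hc : c v (PySem.List.pyGetD a v []) = true
    · rw [if_pos hc]
      have hlen' : (PySem.List.pySetD a v (f v (PySem.List.pyGetD a v []))).length = a.length := by
        simp [PySem.List.length_pySetD]
      obtain ⟨ihl, ihc, ihmono, ihpush, ihsrc, ihsort⟩ :=
        ih (PySem.List.pySetD a v (f v (PySem.List.pyGetD a v [])))
           (pvInsert q (g v (f v (PySem.List.pyGetD a v []))))
           hnd.of_cons (fun u hu => hnn u (by simp [hu]))
           (fun u hu => by rw [hlen']; exact hbd u (by simp [hu]))
      have hcell' : ∀ w : Int, 0 ≤ w → w < (a.length : Int) →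
          pvCell (PySem.List.pySetD a v (f v (PySem.List.pyGetD a v []))) w
            = if w = v then f v (pvCell a w) else pvCell a w := by
        intro w hw0 hw1
        rw [pv_cell_set a v _ hv0 w hw0 hw1]
        by_cases hwv : w = v
        · subst hwv; simp [pvCell]
        · simp [hwv]
      refine ⟨by rw [ihl, hlen'], ?_, ?_, ?_, ?_, ?_⟩
      · intro w hw0 hw1
        rw [ihc w hw0 (by rw [hlen']; exact hw1), hcell' w hw0 hw1]
        by_cases hwv : w = v
        · subst hwv
          simp [pvCell, hvnot, hc]
        · by_cases hwus : w ∈ us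
          · simp [pvCell, hwus, hwv, List.mem_cons]
          · simp [pvCell, hwus, hwv, List.mem_cons]
      · intro e he
        exact ihmono e ((pv_mem_insert q _ e).mpr (Or.inr he))
      · intro w hw hcw
        rcases List.mem_cons.mp hw with rfl | hw'
        · exact ihmono _ ((pv_mem_insert q _ _).mpr (Or.inl rfl))
        · have hw0 : 0 ≤ w := hnn w (by simp [hw'])
          have hw1 : w < (a.length : Int) := hbd w (by simp [hw'])
          have hwv : w ≠ v := fun h => hvnot (h ▸ hw')
          have hcw' : pvCell (PySem.List.pySetD a v (f v (PySem.List.pyGetD a v []))) w = pvCell a w := by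
            rw [hcell' w hw0 hw1, if_neg hwv]
          have := ihpush w hw' (by rw [hcw']; exact hcw)
          rw [hcw'] at this
          exact this
      · intro e he
        rcases ihsrc e he with h | ⟨w, hw, s, hs⟩
        · rcases (pv_mem_insert q _ e).mp h with rfl | h'
          · exact Or.inr ⟨v, by simp, f v (PySem.List.pyGetD a v []), rfl⟩
          · exact Or.inl h'
        · exact Or.inr ⟨w, by simp [hw], s, hs⟩
      · intro hq
        exact ihsort (pv_insert_sorted q _ hq)
    · rw [if_neg hc]
      obtain ⟨ihl, ihc, ihmono, ihpush, ihsrc, ihsort⟩ :=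
        ih a q hnd.of_cons (fun u hu => hnn u (by simp [hu])) (fun u hu => hbd u (by simp [hu]))
      refine ⟨ihl, ?_, ihmono, ?_, ?_, ihsort⟩
      · intro w hw0 hw1
        rw [ihc w hw0 hw1]
        by_cases hwv : w = v
        · subst hwv; simp [pvCell, hvnot, hc]
        · by_cases hwus : w ∈ us <;> simp [pvCell, hwus, hwv, List.mem_cons]
      · intro w hw hcw
        rcases List.mem_cons.mp hw with rfl | hw'
        · exact absurd hcw hc
        · exact ihpush w hw' hcw
      · intro e he
        rcases ihsrc e he with h | ⟨w, hw, s, hs⟩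
        · exact Or.inl h
        · exact Or.inr ⟨w, by simp [hw], s, hs⟩

theorem pv_alive_set (n : Int) (alive : List Bool) (p : Int)
    (hl : (alive.length : Int) = n) (h0 : 0 ≤ p) :
    pvAliveL n (PySem.List.pySetD alive p false)
      = (pvAliveL n alive).filter (fun v => !(v == p)) := by
  unfold pvAliveL
  rw [List.filter_filter]
  apply List.filter_congr
  intro v hv
  obtain ⟨hv0, hvn⟩ := PySem.List.mem_pyRange_one.mp hv
  rw [pv_getD_set alive false p false h0 v hv0 (by omega)]
  by_cases hvp : v = p
  · subst hvp; simp
  · simp [hvp]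

theorem pv_alive_nodup (n : Int) (alive : List Bool) : (pvAliveL n alive).Nodup :=
  (PySem.List.nodup_pyRange_one 0 n).filter _

theorem pv_alive_pairwise (n : Int) (alive : List Bool) : (pvAliveL n alive).Pairwise (· < ·) :=
  (PySem.List.pairwise_lt_pyRange_one 0 n).filter _

theorem pv_alive_range (n : Int) (alive : List Bool) :
    ∀ v ∈ pvAliveL n alive, 0 ≤ v ∧ v < n := by
  intro v hv
  unfold pvAliveL at hv
  exact PySem.List.mem_pyRange_one.mp (List.mem_of_mem_filter hv)

theorem pv_diff_singleton (S : List Int) (p : Int) :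
    PySem.Set.diff S [p] = PySem.Set.discard S p := by
  unfold PySem.Set.diff PySem.Set.discard
  apply List.filter_congr
  intro x _
  by_cases h : x = p <;> simp [List.contains_eq_mem, h]

theorem pv_diff_of_not_mem (S : List Int) (p : Int) (h : p ∉ S) :
    PySem.Set.diff S [p] = S := by
  apply List.filter_eq_self.mpr
  intro x hx
  have : ¬ (x = p) := fun he => h (he ▸ hx)
  simp [List.contains_eq_mem, this]

theorem pv_nodup_subset_length (l l' : List Int) (h : l.Nodup) (hs : l ⊆ l') :
    l.length ≤ l'.length := by
  classical
  calc l.length = l.toFinset.card := (List.toFinset_card_of_nodup h).symm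
  _ ≤ l'.toFinset.card := Finset.card_le_card (by intro x hx; simp at hx ⊢; exact hs hx)
  _ ≤ l'.length := l'.toFinset_card_le

theorem pv_add_nodup (s : List Int) (x : Int) (hs : s.Nodup) : (PySem.Set.add s x).Nodup := by
  by_cases hc : x ∈ s
  · simpa [PySem.Set.add, List.contains_eq_mem, hc] using hs
  · simp [PySem.Set.add, List.contains_eq_mem, hc, List.nodup_append, hs]
    exact fun a ha hax => hc (hax ▸ ha)

theorem pv_update_fresh :
    ∀ (l : List (Int × PySem.Set Int)) (d : PySem.Dict Int (PySem.Set Int)),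
      (∀ k ∈ l.map Prod.fst, d.contains k = false) → (l.map Prod.fst).Nodup →
      (d.update l).items = d.items ++ l := by
  intro l
  induction l with
  | nil => intro d _ _; simp [PySem.Dict.update]
  | cons kv l ih =>
    intro d hfresh hnd
    have hk : d.contains kv.1 = false := hfresh kv.1 (by simp)
    have hstep : d.update (kv :: l) = (d.insert kv.1 kv.2).update l := by
      simp [PySem.Dict.update]
    have hins : (d.insert kv.1 kv.2).items = d.items ++ [kv] := by
      simp [PySem.Dict.insert, hk]
    rw [hstep, ih _ ?_ ?_]
    · rw [hins, List.append_assoc]; rfl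
    · intro k hkl
      have hkk : ¬ (kv.1 == k) = true := by
        have : k ≠ kv.1 := by
          rw [List.map_cons, List.nodup_cons] at hnd
          exact fun he => hnd.1 (he ▸ hkl)
        simp [this.symm]
      simp [PySem.Dict.contains, hins, List.any_append]
      constructor
      · have := hfresh k (by simp [hkl])
        simpa [PySem.Dict.contains] using this
      · simpa using hkk
    · rw [List.map_cons, List.nodup_cons] at hnd
      exact hnd.2

-- the value A stores at key v after eliminating p (diff pass + union pass)
def pvAval (adj : List (PySem.Set Int)) (p v : Int) : PySem.Set Int :=
  if v ∈ pvCell adj p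
  then PySem.Set.union (PySem.Set.diff (pvCell adj v) [p]) (PySem.Set.diff (pvCell adj p) [v])
  else PySem.Set.diff (pvCell adj v) [p]

-- the main simulation step: from the invariants, one iteration of A and of B pick the same
-- vertex and re-establish the invariants
theorem pv_step (n : Int) (G : PySem.Dict Int (PySem.Set Int)) (pq : List (Int × Int))
    (adj radj : List (PySem.Set Int)) (alive : List Bool) (permA permB : List Int) (t : Int)
    (hI : pvInv n G adj radj alive) (hQ : pvQInv n adj alive pq) (hne : pvAliveL n alive ≠ []) :
    ∃ p G' pq' adj' radj' alive',
      pvA_step n (G, permA) t = (G', permA ++ [p]) ∧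
      pvB_step n (pq, adj, radj, alive, permB) t = (pq', adj', radj', alive', permB ++ [p]) ∧
      pvInv n G' adj' radj' alive' ∧ pvQInv n adj' alive' pq' ∧
      pvAliveL n alive' = (pvAliveL n alive).filter (fun v => !(v == p)) ∧
      p ∈ pvAliveL n alive := by
  -- abbreviations
  obtain ⟨l⟩ := G
  have hl : l = (pvAliveL n alive).map (fun v => (v, pvCell adj v)) := hI.items
  subst hl
  obtain ⟨v0, vs, hL⟩ := List.exists_cons_of_ne_nil hne
  have hLsub : ∀ v ∈ pvAliveL n alive, 0 ≤ v ∧ v < n := pv_alive_range n alive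
  have hLnd : (pvAliveL n alive).Nodup := pv_alive_nodup n alive
  have hLpw : (pvAliveL n alive).Pairwise (· < ·) := pv_alive_pairwise n alive
  -- every live degree is < n+1
  have hdegbound : ∀ v ∈ pvAliveL n alive, PySem.Set.len (pvCell adj v) < n + 1 := by
    intro v hv
    obtain ⟨h00, h0n⟩ := hLsub v hv
    have hsub : pvCell adj v ⊆ PySem.List.pyRange 0 n 1 := by
      intro w hw
      have := (hI.mem v hv w hw).1
      exact List.mem_of_mem_filter this
    have hlen := pv_nodup_subset_length _ _ (hI.nd v h00 h0n) hsub
    rw [PySem.List.length_pyRange_one] at hlen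
    show ((pvCell adj v).length : Int) < n + 1
    omega
  -- A's scan over the dict items is the scan over the live list
  have hselA : (((pvAliveL n alive).map (fun v => (v, pvCell adj v))).foldl
      (fun (acc : Int × Int) vadj =>
        if PySem.Set.len vadj.2 < acc.2 then (vadj.1, PySem.Set.len vadj.2) else acc) (-1, n + 1))
      = (pvAliveL n alive).foldl (pvSel adj) (-1, n + 1) := by
    rw [List.foldl_map]; rfl
  -- the scan result is the lexicographic minimum of (degree, vertex)
  rcases pv_scan adj (pvAliveL n alive) (-1, n + 1) hLpw with ⟨_, hall⟩ | ⟨hr1, hr2, _, hr4⟩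
  · exfalso
    have hv0L : v0 ∈ pvAliveL n alive := by rw [hL]; simp
    have h1 := hall v0 hv0L
    have h2 := hdegbound v0 hv0L
    simp only at h1
    omega
  set p : Int := ((pvAliveL n alive).foldl (pvSel adj) (-1, n + 1)).1 with hpdef
  have hpL : p ∈ pvAliveL n alive := hr1
  obtain ⟨hp0, hpn⟩ := hLsub p hpL
  have hpalive : PySem.List.pyGetD alive p false = true := (List.mem_filter.mp hpL).2
  have hr2' : ((pvAliveL n alive).foldl (pvSel adj) (-1, n + 1)).2 = PySem.Set.len (pvCell adj p) := hr2
  -- notation for the A-side value functions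
  have hpnotin : p ∉ pvCell adj p := fun h => (hI.mem p hpL p h).2 rfl
  have hCpnd : (pvCell adj p).Nodup := hI.nd p hp0 hpn
  have hCpsub : ∀ w ∈ pvCell adj p, w ∈ pvAliveL n alive := fun w hw => (hI.mem p hpL w hw).1
  have hDp : PySem.Set.diff (pvCell adj p) [p] = pvCell adj p := pv_diff_of_not_mem _ _ hpnotin
  -- ===== A side =====
  have hkeys : ((pvAliveL n alive).map (fun v => (v, pvCell adj v))).map Prod.fst
      = pvAliveL n alive := by simp [List.map_map, Function.comp_def]
  have hdiffpass : (pvAliveL n alive).foldl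
      (fun G' v => G'.insert v (PySem.Set.diff (G'.getD v []) [p]))
      (PySem.Dict.mk ((pvAliveL n alive).map (fun v => (v, pvCell adj v))))
      = PySem.Dict.mk ((pvAliveL n alive).map
          (fun v => (v, PySem.Set.diff (pvCell adj v) [p]))) := by
    rw [pv_dict_fold0 (fun v S => PySem.Set.diff S [p]) (pvAliveL n alive) (pvAliveL n alive)
        (fun v => pvCell adj v) hLnd (fun u hu => hu)]
    congr 1
    apply List.map_congr_left
    intro v hv
    rw [if_pos hv]
  have hGp : (PySem.Dict.mk ((pvAliveL n alive).map
      (fun v => (v, PySem.Set.diff (pvCell adj v) [p])))).getD p [] = pvCell adj p := by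
    rw [pv_dict_getD, if_pos hpL, hDp]
  have hunionpass : (pvCell adj p).foldl
      (fun G' u => G'.insert u (PySem.Set.union (G'.getD u []) (PySem.Set.diff (G'.getD p []) [u])))
      (PySem.Dict.mk ((pvAliveL n alive).map (fun v => (v, PySem.Set.diff (pvCell adj v) [p]))))
      = PySem.Dict.mk ((pvAliveL n alive).map (fun v => (v, pvAval adj p v))) := by
    unfold pvAval
    rw [pv_dict_foldq (fun u Su Sq => PySem.Set.union Su (PySem.Set.diff Sq [u])) p
        (pvCell adj p) (pvAliveL n alive) (fun v => PySem.Set.diff (pvCell adj v) [p])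
        hCpnd hCpsub hpnotin]
    congr 1
    apply List.map_congr_left
    intro v _
    by_cases hv : v ∈ pvCell adj p
    · rw [if_pos hv, if_pos hv, if_pos hpL, hDp]
    · rw [if_neg hv, if_neg hv]
  have hA : pvA_step n (PySem.Dict.mk ((pvAliveL n alive).map (fun v => (v, pvCell adj v))), permA) t
      = (PySem.Dict.mk (((pvAliveL n alive).filter (fun v => !(v == p))).map
          (fun v => (v, pvAval adj p v))), permA ++ [p]) := by
    show ((PySem.Dict.erase _ _ : PySem.Dict Int (PySem.Set Int)), _) = _
    simp only [hselA]
    rw [← hpdef]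
    simp only [PySem.Dict.keys, hkeys, hdiffpass, hGp, hunionpass,
      PySem.Dict.erase]
    refine Prod.ext ?_ rfl
    show PySem.Dict.mk _ = PySem.Dict.mk _
    rw [List.filter_map]
    rfl
  -- ===== B side: pop the minimum off the queue =====
  have hmin : ∀ e ∈ pq, PySem.List.pyGetD alive e.2 false = true →
      e.1 = PySem.Set.len (PySem.List.pyGetD adj e.2 []) →
      e = (PySem.Set.len (pvCell adj p), p) ∨ pvLtP (PySem.Set.len (pvCell adj p), p) e = true := by
    intro e he hea hed
    obtain ⟨he0, hen⟩ := hQ.range e he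
    have heL : e.2 ∈ pvAliveL n alive :=
      List.mem_filter.mpr ⟨PySem.List.mem_pyRange_one.mpr ⟨he0, hen⟩, hea⟩
    rcases hr4 e.2 heL with h | ⟨h1, h2⟩
    · refine Or.inr ?_
      rw [pv_lt_iff]
      refine Or.inl ?_
      show PySem.Set.len (pvCell adj p) < e.1
      rw [hed]
      rw [hr2'] at h
      exact h
    · by_cases hpe : p = e.2
      · refine Or.inl ?_
        have : e.1 = PySem.Set.len (pvCell adj p) := by rw [hed, ← hpe]; rfl
        exact Prod.ext this hpe.symm
      · refine Or.inr ?_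
        rw [pv_lt_iff]
        refine Or.inr ⟨?_, ?_⟩
        · show PySem.Set.len (pvCell adj p) = e.1
          rw [hed, ← hr2', ← h1]
          rfl
        · show p < e.2
          omega
  obtain ⟨pq1, hpop, hpq1sorted, hpq1sub, hretain⟩ :=
    pv_pop adj alive (PySem.Set.len (pvCell adj p), p) hpalive rfl pq
      hQ.sorted (hQ.mem p hpL) hmin
  have hpop' : pvPopQ adj alive pq = (p, pq1) := hpop
  -- ===== B side: the conditional discard-and-push fold over radj[p] | adj[p] =====
  obtain ⟨hS1len, hS1cell, hS1mono, hS1push, hS1src, hS1sort⟩ :=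
    pv_foldS
      (fun v s => PySem.List.pyGetD (PySem.List.pySetD alive p false) v false && s.contains p)
      (fun _ s => PySem.Set.discard s p)
      (fun v s => (PySem.Set.len s, v))
      (PySem.Set.union (PySem.List.pyGetD radj p []) (PySem.List.pyGetD adj p [])) adj pq1
      (pv_union_nodup _ _ (hI.rnd p hp0 hpn) hCpnd)
      (fun v hv => by
        rcases (pv_mem_union _ _ _).mp hv with h | h
        · exact (hI.rrange p hp0 hpn v h).1
        · exact (hLsub v (hCpsub v h)).1)
      (fun v hv => by
        rw [hI.la]
        rcases (pv_mem_union _ _ _).mp hv with h | h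
        · exact (hI.rrange p hp0 hpn v h).2
        · exact (hLsub v (hCpsub v h)).2)
  -- alive1 lookups
  have halive1 : ∀ w : Int, 0 ≤ w → w < n →
      PySem.List.pyGetD (PySem.List.pySetD alive p false) w false
        = if w = p then false else PySem.List.pyGetD alive w false := by
    intro w hw0 hwn
    exact pv_getD_set alive false p false hp0 w hw0 (by rw [hI.lv]; exact hwn)
  have halive' : pvAliveL n (PySem.List.pySetD alive p false)
      = (pvAliveL n alive).filter (fun v => !(v == p)) := pv_alive_set n alive p hI.lv hp0
  -- port-shaped restatements of the pv_foldS conclusions (definitional)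
  have hlen1 : (((PySem.Set.union (PySem.List.pyGetD radj p []) (PySem.List.pyGetD adj p [])).foldl (fun (aq : List (PySem.Set Int) × List (Int × Int)) v =>
        if PySem.List.pyGetD (PySem.List.pySetD alive p false) v false && (PySem.List.pyGetD aq.1 v []).contains p
        then (PySem.List.pySetD aq.1 v (PySem.Set.discard (PySem.List.pyGetD aq.1 v []) p),
              pvInsert aq.2 (PySem.Set.len (PySem.Set.discard (PySem.List.pyGetD aq.1 v []) p), v))
        else aq) (adj, pq1)).1).length = adj.length := hS1len
  have hc1 : ∀ w : Int, 0 ≤ w → w < n →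
      PySem.List.pyGetD ((PySem.Set.union (PySem.List.pyGetD radj p []) (PySem.List.pyGetD adj p [])).foldl (fun (aq : List (PySem.Set Int) × List (Int × Int)) v =>
        if PySem.List.pyGetD (PySem.List.pySetD alive p false) v false && (PySem.List.pyGetD aq.1 v []).contains p
        then (PySem.List.pySetD aq.1 v (PySem.Set.discard (PySem.List.pyGetD aq.1 v []) p),
              pvInsert aq.2 (PySem.Set.len (PySem.Set.discard (PySem.List.pyGetD aq.1 v []) p), v))
        else aq) (adj, pq1)).1 w []
        = if w ∈ (PySem.Set.union (PySem.List.pyGetD radj p []) (PySem.List.pyGetD adj p [])) ∧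
             (PySem.List.pyGetD (PySem.List.pySetD alive p false) w false && (PySem.List.pyGetD adj w []).contains p) = true
          then PySem.Set.discard (PySem.List.pyGetD adj w []) p else PySem.List.pyGetD adj w [] := by
    intro w hw0 hwn
    exact hS1cell w hw0 (by rw [hI.la]; exact hwn)
  have hS1monoP : ∀ e ∈ pq1, e ∈ ((PySem.Set.union (PySem.List.pyGetD radj p []) (PySem.List.pyGetD adj p [])).foldl (fun (aq : List (PySem.Set Int) × List (Int × Int)) v =>
        if PySem.List.pyGetD (PySem.List.pySetD alive p false) v false && (PySem.List.pyGetD aq.1 v []).contains p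
        then (PySem.List.pySetD aq.1 v (PySem.Set.discard (PySem.List.pyGetD aq.1 v []) p),
              pvInsert aq.2 (PySem.Set.len (PySem.Set.discard (PySem.List.pyGetD aq.1 v []) p), v))
        else aq) (adj, pq1)).2 := hS1mono
  have hS1pushP : ∀ w ∈ (PySem.Set.union (PySem.List.pyGetD radj p []) (PySem.List.pyGetD adj p [])),
      (PySem.List.pyGetD (PySem.List.pySetD alive p false) w false && (PySem.List.pyGetD adj w []).contains p) = true →
      (PySem.Set.len (PySem.Set.discard (PySem.List.pyGetD adj w []) p), w) ∈ ((PySem.Set.union (PySem.List.pyGetD radj p []) (PySem.List.pyGetD adj p [])).foldl (fun (aq : List (PySem.Set Int) × List (Int × Int)) v =>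
        if PySem.List.pyGetD (PySem.List.pySetD alive p false) v false && (PySem.List.pyGetD aq.1 v []).contains p
        then (PySem.List.pySetD aq.1 v (PySem.Set.discard (PySem.List.pyGetD aq.1 v []) p),
              pvInsert aq.2 (PySem.Set.len (PySem.Set.discard (PySem.List.pyGetD aq.1 v []) p), v))
        else aq) (adj, pq1)).2 := hS1push
  have hS1srcP : ∀ e ∈ ((PySem.Set.union (PySem.List.pyGetD radj p []) (PySem.List.pyGetD adj p [])).foldl (fun (aq : List (PySem.Set Int) × List (Int × Int)) v =>
        if PySem.List.pyGetD (PySem.List.pySetD alive p false) v false && (PySem.List.pyGetD aq.1 v []).contains p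
        then (PySem.List.pySetD aq.1 v (PySem.Set.discard (PySem.List.pyGetD aq.1 v []) p),
              pvInsert aq.2 (PySem.Set.len (PySem.Set.discard (PySem.List.pyGetD aq.1 v []) p), v))
        else aq) (adj, pq1)).2, e ∈ pq1 ∨
      ∃ w ∈ (PySem.Set.union (PySem.List.pyGetD radj p []) (PySem.List.pyGetD adj p [])), ∃ sAux : List Int, e = (PySem.Set.len sAux, w) := hS1src
  have hS1sortP : List.Pairwise pvLeP ((PySem.Set.union (PySem.List.pyGetD radj p []) (PySem.List.pyGetD adj p [])).foldl (fun (aq : List (PySem.Set Int) × List (Int × Int)) v =>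
        if PySem.List.pyGetD (PySem.List.pySetD alive p false) v false && (PySem.List.pyGetD aq.1 v []).contains p
        then (PySem.List.pySetD aq.1 v (PySem.Set.discard (PySem.List.pyGetD aq.1 v []) p),
              pvInsert aq.2 (PySem.Set.len (PySem.Set.discard (PySem.List.pyGetD aq.1 v []) p), v))
        else aq) (adj, pq1)).2 := hS1sort hpq1sorted
  have halive1p : PySem.List.pyGetD (PySem.List.pySetD alive p false) p false = false := by
    rw [halive1 p hp0 hpn]; simp
  have hnb : PySem.List.pyGetD ((PySem.Set.union (PySem.List.pyGetD radj p []) (PySem.List.pyGetD adj p [])).foldl (fun (aq : List (PySem.Set Int) × List (Int × Int)) v =>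
        if PySem.List.pyGetD (PySem.List.pySetD alive p false) v false && (PySem.List.pyGetD aq.1 v []).contains p
        then (PySem.List.pySetD aq.1 v (PySem.Set.discard (PySem.List.pyGetD aq.1 v []) p),
              pvInsert aq.2 (PySem.Set.len (PySem.Set.discard (PySem.List.pyGetD aq.1 v []) p), v))
        else aq) (adj, pq1)).1 p [] = PySem.List.pyGetD adj p [] := by
    rw [hc1 p hp0 hpn, halive1p]
    simp
  -- ===== B side: the clique fill-in fold =====
  have hCpnn : ∀ w ∈ pvCell adj p, 0 ≤ w := fun w hw => (hLsub w (hCpsub w hw)).1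
  obtain ⟨hA2len', hA2cell'⟩ := pv_foldB
    (fun u S => PySem.Set.discard (PySem.Set.union S (PySem.List.pyGetD adj p [])) u)
    (pvCell adj p) ((PySem.Set.union (PySem.List.pyGetD radj p []) (PySem.List.pyGetD adj p [])).foldl (fun (aq : List (PySem.Set Int) × List (Int × Int)) v =>
        if PySem.List.pyGetD (PySem.List.pySetD alive p false) v false && (PySem.List.pyGetD aq.1 v []).contains p
        then (PySem.List.pySetD aq.1 v (PySem.Set.discard (PySem.List.pyGetD aq.1 v []) p),
              pvInsert aq.2 (PySem.Set.len (PySem.Set.discard (PySem.List.pyGetD aq.1 v []) p), v))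
        else aq) (adj, pq1)).1 hCpnd hCpnn
  have hA2len : (((PySem.List.pyGetD adj p []).foldl (fun a u =>
      PySem.List.pySetD a u (PySem.Set.discard (PySem.Set.union (PySem.List.pyGetD a u []) (PySem.List.pyGetD adj p [])) u)) ((PySem.Set.union (PySem.List.pyGetD radj p []) (PySem.List.pyGetD adj p [])).foldl (fun (aq : List (PySem.Set Int) × List (Int × Int)) v =>
        if PySem.List.pyGetD (PySem.List.pySetD alive p false) v false && (PySem.List.pyGetD aq.1 v []).contains p
        then (PySem.List.pySetD aq.1 v (PySem.Set.discard (PySem.List.pyGetD aq.1 v []) p),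
              pvInsert aq.2 (PySem.Set.len (PySem.Set.discard (PySem.List.pyGetD aq.1 v []) p), v))
        else aq) (adj, pq1)).1)).length = (((PySem.Set.union (PySem.List.pyGetD radj p []) (PySem.List.pyGetD adj p [])).foldl (fun (aq : List (PySem.Set Int) × List (Int × Int)) v =>
        if PySem.List.pyGetD (PySem.List.pySetD alive p false) v false && (PySem.List.pyGetD aq.1 v []).contains p
        then (PySem.List.pySetD aq.1 v (PySem.Set.discard (PySem.List.pyGetD aq.1 v []) p),
              pvInsert aq.2 (PySem.Set.len (PySem.Set.discard (PySem.List.pyGetD aq.1 v []) p), v))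
        else aq) (adj, pq1)).1).length := hA2len'
  have hc2 : ∀ w : Int, 0 ≤ w → w < n →
      PySem.List.pyGetD ((PySem.List.pyGetD adj p []).foldl (fun a u =>
      PySem.List.pySetD a u (PySem.Set.discard (PySem.Set.union (PySem.List.pyGetD a u []) (PySem.List.pyGetD adj p [])) u)) ((PySem.Set.union (PySem.List.pyGetD radj p []) (PySem.List.pyGetD adj p [])).foldl (fun (aq : List (PySem.Set Int) × List (Int × Int)) v =>
        if PySem.List.pyGetD (PySem.List.pySetD alive p false) v false && (PySem.List.pyGetD aq.1 v []).contains p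
        then (PySem.List.pySetD aq.1 v (PySem.Set.discard (PySem.List.pyGetD aq.1 v []) p),
              pvInsert aq.2 (PySem.Set.len (PySem.Set.discard (PySem.List.pyGetD aq.1 v []) p), v))
        else aq) (adj, pq1)).1) w []
        = if w ∈ pvCell adj p
          then PySem.Set.discard (PySem.Set.union (PySem.List.pyGetD ((PySem.Set.union (PySem.List.pyGetD radj p []) (PySem.List.pyGetD adj p [])).foldl (fun (aq : List (PySem.Set Int) × List (Int × Int)) v =>
        if PySem.List.pyGetD (PySem.List.pySetD alive p false) v false && (PySem.List.pyGetD aq.1 v []).contains p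
        then (PySem.List.pySetD aq.1 v (PySem.Set.discard (PySem.List.pyGetD aq.1 v []) p),
              pvInsert aq.2 (PySem.Set.len (PySem.Set.discard (PySem.List.pyGetD aq.1 v []) p), v))
        else aq) (adj, pq1)).1 w []) (pvCell adj p)) w
          else PySem.List.pyGetD ((PySem.Set.union (PySem.List.pyGetD radj p []) (PySem.List.pyGetD adj p [])).foldl (fun (aq : List (PySem.Set Int) × List (Int × Int)) v =>
        if PySem.List.pyGetD (PySem.List.pySetD alive p false) v false && (PySem.List.pyGetD aq.1 v []).contains p
        then (PySem.List.pySetD aq.1 v (PySem.Set.discard (PySem.List.pyGetD aq.1 v []) p),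
              pvInsert aq.2 (PySem.Set.len (PySem.Set.discard (PySem.List.pyGetD aq.1 v []) p), v))
        else aq) (adj, pq1)).1 w [] := by
    intro w hw0 hwn
    exact hA2cell' w hw0 (by rw [hlen1, hI.la]; exact hwn)
  -- ===== the B step, assembled =====
  have hB : pvB_step n (pq, adj, radj, alive, permB) t
      = ((if 2 * (n - 1 - t) < (((PySem.List.pyGetD adj p []).foldl (fun q u => pvInsert q (PySem.Set.len (PySem.List.pyGetD ((PySem.List.pyGetD adj p []).foldl (fun a u =>
      PySem.List.pySetD a u (PySem.Set.discard (PySem.Set.union (PySem.List.pyGetD a u []) (PySem.List.pyGetD adj p [])) u)) ((PySem.Set.union (PySem.List.pyGetD radj p []) (PySem.List.pyGetD adj p [])).foldl (fun (aq : List (PySem.Set Int) × List (Int × Int)) v =>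
        if PySem.List.pyGetD (PySem.List.pySetD alive p false) v false && (PySem.List.pyGetD aq.1 v []).contains p
        then (PySem.List.pySetD aq.1 v (PySem.Set.discard (PySem.List.pyGetD aq.1 v []) p),
              pvInsert aq.2 (PySem.Set.len (PySem.Set.discard (PySem.List.pyGetD aq.1 v []) p), v))
        else aq) (adj, pq1)).1) u []), u)) ((PySem.Set.union (PySem.List.pyGetD radj p []) (PySem.List.pyGetD adj p [])).foldl (fun (aq : List (PySem.Set Int) × List (Int × Int)) v =>
        if PySem.List.pyGetD (PySem.List.pySetD alive p false) v false && (PySem.List.pyGetD aq.1 v []).contains p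
        then (PySem.List.pySetD aq.1 v (PySem.Set.discard (PySem.List.pyGetD aq.1 v []) p),
              pvInsert aq.2 (PySem.Set.len (PySem.Set.discard (PySem.List.pyGetD aq.1 v []) p), v))
        else aq) (adj, pq1)).2).length : Int) then ((PySem.List.pyGetD adj p []).foldl (fun q u => pvInsert q (PySem.Set.len (PySem.List.pyGetD ((PySem.List.pyGetD adj p []).foldl (fun a u =>
      PySem.List.pySetD a u (PySem.Set.discard (PySem.Set.union (PySem.List.pyGetD a u []) (PySem.List.pyGetD adj p [])) u)) ((PySem.Set.union (PySem.List.pyGetD radj p []) (PySem.List.pyGetD adj p [])).foldl (fun (aq : List (PySem.Set Int) × List (Int × Int)) v =>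
        if PySem.List.pyGetD (PySem.List.pySetD alive p false) v false && (PySem.List.pyGetD aq.1 v []).contains p
        then (PySem.List.pySetD aq.1 v (PySem.Set.discard (PySem.List.pyGetD aq.1 v []) p),
              pvInsert aq.2 (PySem.Set.len (PySem.Set.discard (PySem.List.pyGetD aq.1 v []) p), v))
        else aq) (adj, pq1)).1) u []), u)) ((PySem.Set.union (PySem.List.pyGetD radj p []) (PySem.List.pyGetD adj p [])).foldl (fun (aq : List (PySem.Set Int) × List (Int × Int)) v =>
        if PySem.List.pyGetD (PySem.List.pySetD alive p false) v false && (PySem.List.pyGetD aq.1 v []).contains p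
        then (PySem.List.pySetD aq.1 v (PySem.Set.discard (PySem.List.pyGetD aq.1 v []) p),
              pvInsert aq.2 (PySem.Set.len (PySem.Set.discard (PySem.List.pyGetD aq.1 v []) p), v))
        else aq) (adj, pq1)).2).filter (fun e : Int × Int => PySem.List.pyGetD (PySem.List.pySetD alive p false) e.2 false && (e.1 == PySem.Set.len (PySem.List.pyGetD ((PySem.List.pyGetD adj p []).foldl (fun a u =>
      PySem.List.pySetD a u (PySem.Set.discard (PySem.Set.union (PySem.List.pyGetD a u []) (PySem.List.pyGetD adj p [])) u)) ((PySem.Set.union (PySem.List.pyGetD radj p []) (PySem.List.pyGetD adj p [])).foldl (fun (aq : List (PySem.Set Int) × List (Int × Int)) v =>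
        if PySem.List.pyGetD (PySem.List.pySetD alive p false) v false && (PySem.List.pyGetD aq.1 v []).contains p
        then (PySem.List.pySetD aq.1 v (PySem.Set.discard (PySem.List.pyGetD aq.1 v []) p),
              pvInsert aq.2 (PySem.Set.len (PySem.Set.discard (PySem.List.pyGetD aq.1 v []) p), v))
        else aq) (adj, pq1)).1) e.2 []))) else ((PySem.List.pyGetD adj p []).foldl (fun q u => pvInsert q (PySem.Set.len (PySem.List.pyGetD ((PySem.List.pyGetD adj p []).foldl (fun a u =>
      PySem.List.pySetD a u (PySem.Set.discard (PySem.Set.union (PySem.List.pyGetD a u []) (PySem.List.pyGetD adj p [])) u)) ((PySem.Set.union (PySem.List.pyGetD radj p []) (PySem.List.pyGetD adj p [])).foldl (fun (aq : List (PySem.Set Int) × List (Int × Int)) v =>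
        if PySem.List.pyGetD (PySem.List.pySetD alive p false) v false && (PySem.List.pyGetD aq.1 v []).contains p
        then (PySem.List.pySetD aq.1 v (PySem.Set.discard (PySem.List.pyGetD aq.1 v []) p),
              pvInsert aq.2 (PySem.Set.len (PySem.Set.discard (PySem.List.pyGetD aq.1 v []) p), v))
        else aq) (adj, pq1)).1) u []), u)) ((PySem.Set.union (PySem.List.pyGetD radj p []) (PySem.List.pyGetD adj p [])).foldl (fun (aq : List (PySem.Set Int) × List (Int × Int)) v =>
        if PySem.List.pyGetD (PySem.List.pySetD alive p false) v false && (PySem.List.pyGetD aq.1 v []).contains p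
        then (PySem.List.pySetD aq.1 v (PySem.Set.discard (PySem.List.pyGetD aq.1 v []) p),
              pvInsert aq.2 (PySem.Set.len (PySem.Set.discard (PySem.List.pyGetD aq.1 v []) p), v))
        else aq) (adj, pq1)).2)), ((PySem.List.pyGetD adj p []).foldl (fun a u =>
      PySem.List.pySetD a u (PySem.Set.discard (PySem.Set.union (PySem.List.pyGetD a u []) (PySem.List.pyGetD adj p [])) u)) ((PySem.Set.union (PySem.List.pyGetD radj p []) (PySem.List.pyGetD adj p [])).foldl (fun (aq : List (PySem.Set Int) × List (Int × Int)) v =>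
        if PySem.List.pyGetD (PySem.List.pySetD alive p false) v false && (PySem.List.pyGetD aq.1 v []).contains p
        then (PySem.List.pySetD aq.1 v (PySem.Set.discard (PySem.List.pyGetD aq.1 v []) p),
              pvInsert aq.2 (PySem.Set.len (PySem.Set.discard (PySem.List.pyGetD aq.1 v []) p), v))
        else aq) (adj, pq1)).1), radj, (PySem.List.pySetD alive p false), permB ++ [p]) := by
    simp only [pvB_step, hpop']
    rw [hnb]
  -- cell values of S1 on live vertices: exactly A's difference pass
  have hc1v : ∀ v ∈ pvAliveL n alive, v ≠ p →
      PySem.List.pyGetD ((PySem.Set.union (PySem.List.pyGetD radj p []) (PySem.List.pyGetD adj p [])).foldl (fun (aq : List (PySem.Set Int) × List (Int × Int)) v =>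
        if PySem.List.pyGetD (PySem.List.pySetD alive p false) v false && (PySem.List.pyGetD aq.1 v []).contains p
        then (PySem.List.pySetD aq.1 v (PySem.Set.discard (PySem.List.pyGetD aq.1 v []) p),
              pvInsert aq.2 (PySem.Set.len (PySem.Set.discard (PySem.List.pyGetD aq.1 v []) p), v))
        else aq) (adj, pq1)).1 v [] = PySem.Set.diff (pvCell adj v) [p] := by
    intro v hv hvp
    obtain ⟨hv0, hvn⟩ := hLsub v hv
    rw [hc1 v hv0 hvn]
    by_cases hpv : p ∈ pvCell adj v
    · have hvr : v ∈ (PySem.Set.union (PySem.List.pyGetD radj p []) (PySem.List.pyGetD adj p [])) := (pv_mem_union _ _ _).mpr (hI.sup v hv p hpv)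
      have ha1 : PySem.List.pyGetD (PySem.List.pySetD alive p false) v false = true := by
        rw [halive1 v hv0 hvn, if_neg hvp]
        exact (List.mem_filter.mp hv).2
      rw [if_pos ⟨hvr, by simp [ha1, List.contains_eq_mem]; exact hpv⟩, ← pv_diff_singleton]
      rfl
    · have hncond : ¬(v ∈ (PySem.Set.union (PySem.List.pyGetD radj p []) (PySem.List.pyGetD adj p [])) ∧
          (PySem.List.pyGetD (PySem.List.pySetD alive p false) v false
            && (PySem.List.pyGetD adj v []).contains p) = true) := by
        rintro ⟨-, hcc⟩
        rw [Bool.and_eq_true] at hcc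
        exact hpv (by simpa [List.contains_eq_mem] using hcc.2)
      rw [if_neg hncond, pv_diff_of_not_mem _ _ hpv]
      rfl
  -- S1 cells are nodup everywhere
  have hnd1 : ∀ w : Int, 0 ≤ w → w < n → (PySem.List.pyGetD ((PySem.Set.union (PySem.List.pyGetD radj p []) (PySem.List.pyGetD adj p [])).foldl (fun (aq : List (PySem.Set Int) × List (Int × Int)) v =>
        if PySem.List.pyGetD (PySem.List.pySetD alive p false) v false && (PySem.List.pyGetD aq.1 v []).contains p
        then (PySem.List.pySetD aq.1 v (PySem.Set.discard (PySem.List.pyGetD aq.1 v []) p),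
              pvInsert aq.2 (PySem.Set.len (PySem.Set.discard (PySem.List.pyGetD aq.1 v []) p), v))
        else aq) (adj, pq1)).1 w []).Nodup := by
    intro w hw0 hwn
    rw [hc1 w hw0 hwn]
    by_cases hcw : w ∈ (PySem.Set.union (PySem.List.pyGetD radj p []) (PySem.List.pyGetD adj p [])) ∧
        (PySem.List.pyGetD (PySem.List.pySetD alive p false) w false && (PySem.List.pyGetD adj w []).contains p) = true
    · rw [if_pos hcw]; exact List.Nodup.filter _ (hI.nd w hw0 hwn)
    · rw [if_neg hcw]; exact hI.nd w hw0 hwn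
  -- the final adj cell on a live vertex v ≠ p is A's value
  have hvnotinD : ∀ v ∈ pvAliveL n alive, v ∉ PySem.Set.diff (pvCell adj v) [p] := by
    intro v hv hmem
    exact (hI.mem v hv v (List.mem_of_mem_filter hmem)).2 rfl
  have hcell : ∀ v ∈ pvAliveL n alive, v ≠ p →
      PySem.List.pyGetD ((PySem.List.pyGetD adj p []).foldl (fun a u =>
      PySem.List.pySetD a u (PySem.Set.discard (PySem.Set.union (PySem.List.pyGetD a u []) (PySem.List.pyGetD adj p [])) u)) ((PySem.Set.union (PySem.List.pyGetD radj p []) (PySem.List.pyGetD adj p [])).foldl (fun (aq : List (PySem.Set Int) × List (Int × Int)) v =>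
        if PySem.List.pyGetD (PySem.List.pySetD alive p false) v false && (PySem.List.pyGetD aq.1 v []).contains p
        then (PySem.List.pySetD aq.1 v (PySem.Set.discard (PySem.List.pyGetD aq.1 v []) p),
              pvInsert aq.2 (PySem.Set.len (PySem.Set.discard (PySem.List.pyGetD aq.1 v []) p), v))
        else aq) (adj, pq1)).1) v [] = pvAval adj p v := by
    intro v hv hvp
    obtain ⟨hv0, hvn⟩ := hLsub v hv
    rw [hc2 v hv0 hvn, pvAval]
    by_cases hvCp : v ∈ pvCell adj p
    · rw [if_pos hvCp, if_pos hvCp, hc1v v hv hvp,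
          ← pv_union_discard _ _ v (hvnotinD v hv) hCpnd]
    · rw [if_neg hvCp, if_neg hvCp, hc1v v hv hvp]
  -- membership analysis of the new A-value
  have hmemD : ∀ v w : Int, w ∈ PySem.Set.diff (pvCell adj v) [p] → w ∈ pvCell adj v ∧ w ≠ p := by
    intro v w hw
    obtain ⟨hw1, hw2⟩ := List.mem_filter.mp hw
    refine ⟨hw1, ?_⟩
    simpa [List.contains_eq_mem] using hw2
  have hmemval : ∀ v ∈ pvAliveL n alive, ∀ w ∈ pvAval adj p v,
      (w ∈ pvAliveL n alive ∧ w ≠ p) ∧ w ≠ v ∧ (w ∈ pvCell adj v ∨ (v ∈ pvCell adj p ∧ w ∈ pvCell adj p)) := by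
    intro v hv w hw
    unfold pvAval at hw
    by_cases hvCp : v ∈ pvCell adj p
    · rw [if_pos hvCp] at hw
      rcases pv_mem_union _ _ _ |>.mp hw with hwD | hwC
      · obtain ⟨hw1, hw2⟩ := hmemD v w hwD
        exact ⟨⟨(hI.mem v hv w hw1).1, hw2⟩, (hI.mem v hv w hw1).2, Or.inl hw1⟩
      · obtain ⟨hw1, hw2'⟩ := List.mem_filter.mp hwC
        have hwv : w ≠ v := by simpa [List.contains_eq_mem] using hw2'
        exact ⟨⟨(hI.mem p hpL w hw1).1, (hI.mem p hpL w hw1).2⟩, hwv, Or.inr ⟨hvCp, hw1⟩⟩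
    · rw [if_neg hvCp] at hw
      obtain ⟨hw1, hw2⟩ := hmemD v w hw
      exact ⟨⟨(hI.mem v hv w hw1).1, hw2⟩, (hI.mem v hv w hw1).2, Or.inl hw1⟩
  have hmemL' : ∀ w : Int, w ∈ pvAliveL n alive → w ≠ p →
      w ∈ (pvAliveL n alive).filter (fun v => !(v == p)) := by
    intro w hw hwp
    exact List.mem_filter.mpr ⟨hw, by simpa using hwp⟩
  -- a surviving member of an old adjacency set survives in the new one
  have hsurvive : ∀ q ∈ pvAliveL n alive, q ≠ p → ∀ v, v ∈ pvCell adj q → v ≠ p →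
      v ∈ PySem.List.pyGetD ((PySem.List.pyGetD adj p []).foldl (fun a u =>
      PySem.List.pySetD a u (PySem.Set.discard (PySem.Set.union (PySem.List.pyGetD a u []) (PySem.List.pyGetD adj p [])) u)) ((PySem.Set.union (PySem.List.pyGetD radj p []) (PySem.List.pyGetD adj p [])).foldl (fun (aq : List (PySem.Set Int) × List (Int × Int)) v =>
        if PySem.List.pyGetD (PySem.List.pySetD alive p false) v false && (PySem.List.pyGetD aq.1 v []).contains p
        then (PySem.List.pySetD aq.1 v (PySem.Set.discard (PySem.List.pyGetD aq.1 v []) p),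
              pvInsert aq.2 (PySem.Set.len (PySem.Set.discard (PySem.List.pyGetD aq.1 v []) p), v))
        else aq) (adj, pq1)).1) q [] := by
    intro q hqL hqp v hvq hvp
    rw [hcell q hqL hqp]
    have hvin : v ∈ PySem.Set.diff (pvCell adj q) [p] :=
      List.mem_filter.mpr ⟨hvq, by simp [List.contains_eq_mem, hvp]⟩
    rw [pvAval]
    by_cases hqCp : q ∈ pvCell adj p
    · rw [if_pos hqCp]
      exact (pv_mem_union _ _ _).mpr (Or.inl hvin)
    · rw [if_neg hqCp]
      exact hvin
  -- assemble
  refine ⟨p, _, _, _, _, _, hA, hB, ⟨?_, ?_, ?_, ?_, ?_, ?_, ?_, ?_, ?_, ?_⟩, ?_, halive', hpL⟩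
  · show ((_ : List (PySem.Set Int)).length : Int) = n
    rw [hA2len, hlen1]
    exact hI.la
  · exact hI.lr
  · show (((PySem.List.pySetD alive p false)).length : Int) = n
    rw [PySem.List.length_pySetD]
    exact hI.lv
  · -- items
    show (((pvAliveL n alive).filter (fun v => !(v == p))).map (fun v => (v, pvAval adj p v)))
        = (pvAliveL n (PySem.List.pySetD alive p false)).map _
    rw [halive']
    apply List.map_congr_left
    intro v hv
    obtain ⟨hvL, hvpb⟩ := List.mem_filter.mp hv
    have hvp : v ≠ p := by simpa using hvpb
    rw [show pvCell _ v = pvAval adj p v from hcell v hvL hvp]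
  · -- nd
    intro w hw0 hwn
    show (PySem.List.pyGetD _ w []).Nodup
    rw [hc2 w hw0 hwn]
    by_cases hwCp : w ∈ pvCell adj p
    · rw [if_pos hwCp]
      exact List.Nodup.filter _ (pv_union_nodup _ _ (hnd1 w hw0 hwn) hCpnd)
    · rw [if_neg hwCp]
      exact hnd1 w hw0 hwn
  · -- mem
    intro v hv w hw
    rw [halive'] at hv
    obtain ⟨hvL, hvpb⟩ := List.mem_filter.mp hv
    have hvp : v ≠ p := by simpa using hvpb
    rw [show pvCell _ v = pvAval adj p v from hcell v hvL hvp] at hw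
    obtain ⟨⟨hwL, hwp⟩, hwv, _⟩ := hmemval v hvL w hw
    rw [halive']
    exact ⟨hmemL' w hwL hwp, hwv⟩
  · -- sup: an edge v → q of the new graph is covered by radj[q] (unchanged) or by the
    -- symmetric fill/surviving edge q → v
    intro v hv q hq
    rw [halive'] at hv
    obtain ⟨hvL, hvpb⟩ := List.mem_filter.mp hv
    have hvp : v ≠ p := by simpa using hvpb
    rw [show pvCell _ v = pvAval adj p v from hcell v hvL hvp] at hq
    obtain ⟨⟨hqL, hqp⟩, hqv, horigin⟩ := hmemval v hvL q hq
    rcases horigin with hqe | ⟨hvCp, hqCp⟩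
    · rcases hI.sup v hvL q hqe with h | h
      · exact Or.inl h
      · exact Or.inr (hsurvive q hqL hqp v h hvp)
    · refine Or.inr ?_
      show v ∈ PySem.List.pyGetD _ q []
      rw [hcell q hqL hqp, pvAval, if_pos hqCp]
      refine (pv_mem_union _ _ _).mpr (Or.inr ?_)
      exact List.mem_filter.mpr ⟨hvCp, by simp [List.contains_eq_mem, Ne.symm hqv]⟩
  · -- rrange (radj unchanged)
    exact hI.rrange
  · -- rnd
    exact hI.rnd
  · -- rirr
    exact hI.rirr
  · -- queue invariant
    have hsortQ2 : List.Pairwise pvLeP ((PySem.List.pyGetD adj p []).foldl (fun q u => pvInsert q (PySem.Set.len (PySem.List.pyGetD ((PySem.List.pyGetD adj p []).foldl (fun a u =>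
      PySem.List.pySetD a u (PySem.Set.discard (PySem.Set.union (PySem.List.pyGetD a u []) (PySem.List.pyGetD adj p [])) u)) ((PySem.Set.union (PySem.List.pyGetD radj p []) (PySem.List.pyGetD adj p [])).foldl (fun (aq : List (PySem.Set Int) × List (Int × Int)) v =>
        if PySem.List.pyGetD (PySem.List.pySetD alive p false) v false && (PySem.List.pyGetD aq.1 v []).contains p
        then (PySem.List.pySetD aq.1 v (PySem.Set.discard (PySem.List.pyGetD aq.1 v []) p),
              pvInsert aq.2 (PySem.Set.len (PySem.Set.discard (PySem.List.pyGetD aq.1 v []) p), v))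
        else aq) (adj, pq1)).1) u []), u)) ((PySem.Set.union (PySem.List.pyGetD radj p []) (PySem.List.pyGetD adj p [])).foldl (fun (aq : List (PySem.Set Int) × List (Int × Int)) v =>
        if PySem.List.pyGetD (PySem.List.pySetD alive p false) v false && (PySem.List.pyGetD aq.1 v []).contains p
        then (PySem.List.pySetD aq.1 v (PySem.Set.discard (PySem.List.pyGetD aq.1 v []) p),
              pvInsert aq.2 (PySem.Set.len (PySem.Set.discard (PySem.List.pyGetD aq.1 v []) p), v))
        else aq) (adj, pq1)).2) :=
      pv_foldI_sorted (fun u => (PySem.Set.len (PySem.List.pyGetD ((PySem.List.pyGetD adj p []).foldl (fun a u =>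
      PySem.List.pySetD a u (PySem.Set.discard (PySem.Set.union (PySem.List.pyGetD a u []) (PySem.List.pyGetD adj p [])) u)) ((PySem.Set.union (PySem.List.pyGetD radj p []) (PySem.List.pyGetD adj p [])).foldl (fun (aq : List (PySem.Set Int) × List (Int × Int)) v =>
        if PySem.List.pyGetD (PySem.List.pySetD alive p false) v false && (PySem.List.pyGetD aq.1 v []).contains p
        then (PySem.List.pySetD aq.1 v (PySem.Set.discard (PySem.List.pyGetD aq.1 v []) p),
              pvInsert aq.2 (PySem.Set.len (PySem.Set.discard (PySem.List.pyGetD aq.1 v []) p), v))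
        else aq) (adj, pq1)).1) u []), u))
        (PySem.List.pyGetD adj p []) ((PySem.Set.union (PySem.List.pyGetD radj p []) (PySem.List.pyGetD adj p [])).foldl (fun (aq : List (PySem.Set Int) × List (Int × Int)) v =>
        if PySem.List.pyGetD (PySem.List.pySetD alive p false) v false && (PySem.List.pyGetD aq.1 v []).contains p
        then (PySem.List.pySetD aq.1 v (PySem.Set.discard (PySem.List.pyGetD aq.1 v []) p),
              pvInsert aq.2 (PySem.Set.len (PySem.Set.discard (PySem.List.pyGetD aq.1 v []) p), v))
        else aq) (adj, pq1)).2 hS1sortP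
    have hmemQ2 : ∀ v ∈ pvAliveL n (PySem.List.pySetD alive p false),
        (PySem.Set.len (PySem.List.pyGetD ((PySem.List.pyGetD adj p []).foldl (fun a u =>
      PySem.List.pySetD a u (PySem.Set.discard (PySem.Set.union (PySem.List.pyGetD a u []) (PySem.List.pyGetD adj p [])) u)) ((PySem.Set.union (PySem.List.pyGetD radj p []) (PySem.List.pyGetD adj p [])).foldl (fun (aq : List (PySem.Set Int) × List (Int × Int)) v =>
        if PySem.List.pyGetD (PySem.List.pySetD alive p false) v false && (PySem.List.pyGetD aq.1 v []).contains p
        then (PySem.List.pySetD aq.1 v (PySem.Set.discard (PySem.List.pyGetD aq.1 v []) p),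
              pvInsert aq.2 (PySem.Set.len (PySem.Set.discard (PySem.List.pyGetD aq.1 v []) p), v))
        else aq) (adj, pq1)).1) v []), v) ∈ ((PySem.List.pyGetD adj p []).foldl (fun q u => pvInsert q (PySem.Set.len (PySem.List.pyGetD ((PySem.List.pyGetD adj p []).foldl (fun a u =>
      PySem.List.pySetD a u (PySem.Set.discard (PySem.Set.union (PySem.List.pyGetD a u []) (PySem.List.pyGetD adj p [])) u)) ((PySem.Set.union (PySem.List.pyGetD radj p []) (PySem.List.pyGetD adj p [])).foldl (fun (aq : List (PySem.Set Int) × List (Int × Int)) v =>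
        if PySem.List.pyGetD (PySem.List.pySetD alive p false) v false && (PySem.List.pyGetD aq.1 v []).contains p
        then (PySem.List.pySetD aq.1 v (PySem.Set.discard (PySem.List.pyGetD aq.1 v []) p),
              pvInsert aq.2 (PySem.Set.len (PySem.Set.discard (PySem.List.pyGetD aq.1 v []) p), v))
        else aq) (adj, pq1)).1) u []), u)) ((PySem.Set.union (PySem.List.pyGetD radj p []) (PySem.List.pyGetD adj p [])).foldl (fun (aq : List (PySem.Set Int) × List (Int × Int)) v =>
        if PySem.List.pyGetD (PySem.List.pySetD alive p false) v false && (PySem.List.pyGetD aq.1 v []).contains p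
        then (PySem.List.pySetD aq.1 v (PySem.Set.discard (PySem.List.pyGetD aq.1 v []) p),
              pvInsert aq.2 (PySem.Set.len (PySem.Set.discard (PySem.List.pyGetD aq.1 v []) p), v))
        else aq) (adj, pq1)).2) := by
      intro v hv1
      have hv' : v ∈ (pvAliveL n alive).filter (fun v => !(v == p)) := by
        rw [← halive']; exact hv1
      obtain ⟨hvL, hvpb⟩ := List.mem_filter.mp hv'
      have hvp : v ≠ p := by simpa using hvpb
      obtain ⟨hv0, hvn⟩ := hLsub v hvL
      by_cases hvnb : v ∈ pvCell adj p
      · exact pv_foldI_mem (fun u => (PySem.Set.len (PySem.List.pyGetD ((PySem.List.pyGetD adj p []).foldl (fun a u =>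
      PySem.List.pySetD a u (PySem.Set.discard (PySem.Set.union (PySem.List.pyGetD a u []) (PySem.List.pyGetD adj p [])) u)) ((PySem.Set.union (PySem.List.pyGetD radj p []) (PySem.List.pyGetD adj p [])).foldl (fun (aq : List (PySem.Set Int) × List (Int × Int)) v =>
        if PySem.List.pyGetD (PySem.List.pySetD alive p false) v false && (PySem.List.pyGetD aq.1 v []).contains p
        then (PySem.List.pySetD aq.1 v (PySem.Set.discard (PySem.List.pyGetD aq.1 v []) p),
              pvInsert aq.2 (PySem.Set.len (PySem.Set.discard (PySem.List.pyGetD aq.1 v []) p), v))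
        else aq) (adj, pq1)).1) u []), u))
          (PySem.List.pyGetD adj p []) ((PySem.Set.union (PySem.List.pyGetD radj p []) (PySem.List.pyGetD adj p [])).foldl (fun (aq : List (PySem.Set Int) × List (Int × Int)) v =>
        if PySem.List.pyGetD (PySem.List.pySetD alive p false) v false && (PySem.List.pyGetD aq.1 v []).contains p
        then (PySem.List.pySetD aq.1 v (PySem.Set.discard (PySem.List.pyGetD aq.1 v []) p),
              pvInsert aq.2 (PySem.Set.len (PySem.Set.discard (PySem.List.pyGetD aq.1 v []) p), v))
        else aq) (adj, pq1)).2 v hvnb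
      · have hcv : PySem.List.pyGetD ((PySem.List.pyGetD adj p []).foldl (fun a u =>
      PySem.List.pySetD a u (PySem.Set.discard (PySem.Set.union (PySem.List.pyGetD a u []) (PySem.List.pyGetD adj p [])) u)) ((PySem.Set.union (PySem.List.pyGetD radj p []) (PySem.List.pyGetD adj p [])).foldl (fun (aq : List (PySem.Set Int) × List (Int × Int)) v =>
        if PySem.List.pyGetD (PySem.List.pySetD alive p false) v false && (PySem.List.pyGetD aq.1 v []).contains p
        then (PySem.List.pySetD aq.1 v (PySem.Set.discard (PySem.List.pyGetD aq.1 v []) p),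
              pvInsert aq.2 (PySem.Set.len (PySem.Set.discard (PySem.List.pyGetD aq.1 v []) p), v))
        else aq) (adj, pq1)).1) v [] = PySem.List.pyGetD ((PySem.Set.union (PySem.List.pyGetD radj p []) (PySem.List.pyGetD adj p [])).foldl (fun (aq : List (PySem.Set Int) × List (Int × Int)) v =>
        if PySem.List.pyGetD (PySem.List.pySetD alive p false) v false && (PySem.List.pyGetD aq.1 v []).contains p
        then (PySem.List.pySetD aq.1 v (PySem.Set.discard (PySem.List.pyGetD aq.1 v []) p),
              pvInsert aq.2 (PySem.Set.len (PySem.Set.discard (PySem.List.pyGetD aq.1 v []) p), v))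
        else aq) (adj, pq1)).1 v [] := by
          rw [hc2 v hv0 hvn, if_neg hvnb]
        by_cases hcond : v ∈ (PySem.Set.union (PySem.List.pyGetD radj p []) (PySem.List.pyGetD adj p [])) ∧
            (PySem.List.pyGetD (PySem.List.pySetD alive p false) v false && (PySem.List.pyGetD adj v []).contains p) = true
        · have hpush := hS1pushP v hcond.1 hcond.2
          have hs1v : PySem.List.pyGetD ((PySem.Set.union (PySem.List.pyGetD radj p []) (PySem.List.pyGetD adj p [])).foldl (fun (aq : List (PySem.Set Int) × List (Int × Int)) v =>
        if PySem.List.pyGetD (PySem.List.pySetD alive p false) v false && (PySem.List.pyGetD aq.1 v []).contains p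
        then (PySem.List.pySetD aq.1 v (PySem.Set.discard (PySem.List.pyGetD aq.1 v []) p),
              pvInsert aq.2 (PySem.Set.len (PySem.Set.discard (PySem.List.pyGetD aq.1 v []) p), v))
        else aq) (adj, pq1)).1 v []
              = PySem.Set.discard (PySem.List.pyGetD adj v []) p := by
            rw [hc1 v hv0 hvn, if_pos hcond]
          rw [hcv, hs1v]
          exact pv_foldI_mono _ _ _ _ hpush
        · have hs1v : PySem.List.pyGetD ((PySem.Set.union (PySem.List.pyGetD radj p []) (PySem.List.pyGetD adj p [])).foldl (fun (aq : List (PySem.Set Int) × List (Int × Int)) v =>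
        if PySem.List.pyGetD (PySem.List.pySetD alive p false) v false && (PySem.List.pyGetD aq.1 v []).contains p
        then (PySem.List.pySetD aq.1 v (PySem.Set.discard (PySem.List.pyGetD aq.1 v []) p),
              pvInsert aq.2 (PySem.Set.len (PySem.Set.discard (PySem.List.pyGetD aq.1 v []) p), v))
        else aq) (adj, pq1)).1 v [] = PySem.List.pyGetD adj v [] := by
            rw [hc1 v hv0 hvn, if_neg hcond]
          rw [hcv, hs1v]
          have hold := hQ.mem v hvL
          have hne2 : (PySem.Set.len (pvCell adj v), v) ≠ (PySem.Set.len (pvCell adj p), p) :=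
            fun h => hvp (congrArg Prod.snd h)
          have hin1 : (PySem.Set.len (pvCell adj v), v) ∈ pq1 :=
            hretain _ hold (List.mem_filter.mp hvL).2 rfl hne2
          exact pv_foldI_mono _ _ _ _ (hS1monoP _ hin1)
    have hrngQ2 : ∀ e ∈ ((PySem.List.pyGetD adj p []).foldl (fun q u => pvInsert q (PySem.Set.len (PySem.List.pyGetD ((PySem.List.pyGetD adj p []).foldl (fun a u =>
      PySem.List.pySetD a u (PySem.Set.discard (PySem.Set.union (PySem.List.pyGetD a u []) (PySem.List.pyGetD adj p [])) u)) ((PySem.Set.union (PySem.List.pyGetD radj p []) (PySem.List.pyGetD adj p [])).foldl (fun (aq : List (PySem.Set Int) × List (Int × Int)) v =>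
        if PySem.List.pyGetD (PySem.List.pySetD alive p false) v false && (PySem.List.pyGetD aq.1 v []).contains p
        then (PySem.List.pySetD aq.1 v (PySem.Set.discard (PySem.List.pyGetD aq.1 v []) p),
              pvInsert aq.2 (PySem.Set.len (PySem.Set.discard (PySem.List.pyGetD aq.1 v []) p), v))
        else aq) (adj, pq1)).1) u []), u)) ((PySem.Set.union (PySem.List.pyGetD radj p []) (PySem.List.pyGetD adj p [])).foldl (fun (aq : List (PySem.Set Int) × List (Int × Int)) v =>
        if PySem.List.pyGetD (PySem.List.pySetD alive p false) v false && (PySem.List.pyGetD aq.1 v []).contains p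
        then (PySem.List.pySetD aq.1 v (PySem.Set.discard (PySem.List.pyGetD aq.1 v []) p),
              pvInsert aq.2 (PySem.Set.len (PySem.Set.discard (PySem.List.pyGetD aq.1 v []) p), v))
        else aq) (adj, pq1)).2), 0 ≤ e.2 ∧ e.2 < n := by
      intro e he
      rcases pv_foldI_src (fun u => (PySem.Set.len (PySem.List.pyGetD ((PySem.List.pyGetD adj p []).foldl (fun a u =>
      PySem.List.pySetD a u (PySem.Set.discard (PySem.Set.union (PySem.List.pyGetD a u []) (PySem.List.pyGetD adj p [])) u)) ((PySem.Set.union (PySem.List.pyGetD radj p []) (PySem.List.pyGetD adj p [])).foldl (fun (aq : List (PySem.Set Int) × List (Int × Int)) v =>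
        if PySem.List.pyGetD (PySem.List.pySetD alive p false) v false && (PySem.List.pyGetD aq.1 v []).contains p
        then (PySem.List.pySetD aq.1 v (PySem.Set.discard (PySem.List.pyGetD aq.1 v []) p),
              pvInsert aq.2 (PySem.Set.len (PySem.Set.discard (PySem.List.pyGetD aq.1 v []) p), v))
        else aq) (adj, pq1)).1) u []), u))
          (PySem.List.pyGetD adj p []) ((PySem.Set.union (PySem.List.pyGetD radj p []) (PySem.List.pyGetD adj p [])).foldl (fun (aq : List (PySem.Set Int) × List (Int × Int)) v =>
        if PySem.List.pyGetD (PySem.List.pySetD alive p false) v false && (PySem.List.pyGetD aq.1 v []).contains p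
        then (PySem.List.pySetD aq.1 v (PySem.Set.discard (PySem.List.pyGetD aq.1 v []) p),
              pvInsert aq.2 (PySem.Set.len (PySem.Set.discard (PySem.List.pyGetD aq.1 v []) p), v))
        else aq) (adj, pq1)).2 e he with h | ⟨u, hu, rfl⟩
      · rcases hS1srcP e h with h' | ⟨w, hw, sAux, rfl⟩
        · exact hQ.range e (hpq1sub e h')
        · rcases (pv_mem_union _ _ _).mp hw with h2 | h2
          · exact hI.rrange p hp0 hpn w h2
          · exact hLsub w (hCpsub w h2)
      · exact hLsub u (hCpsub u hu)
    by_cases hcomp : 2 * (n - 1 - t) < ((((PySem.List.pyGetD adj p []).foldl (fun q u => pvInsert q (PySem.Set.len (PySem.List.pyGetD ((PySem.List.pyGetD adj p []).foldl (fun a u =>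
      PySem.List.pySetD a u (PySem.Set.discard (PySem.Set.union (PySem.List.pyGetD a u []) (PySem.List.pyGetD adj p [])) u)) ((PySem.Set.union (PySem.List.pyGetD radj p []) (PySem.List.pyGetD adj p [])).foldl (fun (aq : List (PySem.Set Int) × List (Int × Int)) v =>
        if PySem.List.pyGetD (PySem.List.pySetD alive p false) v false && (PySem.List.pyGetD aq.1 v []).contains p
        then (PySem.List.pySetD aq.1 v (PySem.Set.discard (PySem.List.pyGetD aq.1 v []) p),
              pvInsert aq.2 (PySem.Set.len (PySem.Set.discard (PySem.List.pyGetD aq.1 v []) p), v))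
        else aq) (adj, pq1)).1) u []), u)) ((PySem.Set.union (PySem.List.pyGetD radj p []) (PySem.List.pyGetD adj p [])).foldl (fun (aq : List (PySem.Set Int) × List (Int × Int)) v =>
        if PySem.List.pyGetD (PySem.List.pySetD alive p false) v false && (PySem.List.pyGetD aq.1 v []).contains p
        then (PySem.List.pySetD aq.1 v (PySem.Set.discard (PySem.List.pyGetD aq.1 v []) p),
              pvInsert aq.2 (PySem.Set.len (PySem.Set.discard (PySem.List.pyGetD aq.1 v []) p), v))
        else aq) (adj, pq1)).2)).length : Int)
    · rw [if_pos hcomp]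
      refine ⟨List.Pairwise.filter _ hsortQ2, ?_, ?_⟩
      · intro v hv1
        refine List.mem_filter.mpr ⟨hmemQ2 v hv1, ?_⟩
        have ha : PySem.List.pyGetD (PySem.List.pySetD alive p false) v false = true := (List.mem_filter.mp hv1).2
        simp [ha, pvCell]
      · intro e he'
        exact hrngQ2 e (List.mem_of_mem_filter he')
    · rw [if_neg hcomp]
      exact ⟨hsortQ2, hmemQ2, hrngQ2⟩

theorem pv_main (n : Int) :
    ∀ (toks : List Int) (G : PySem.Dict Int (PySem.Set Int)) (pq : List (Int × Int))
      (adj radj : List (PySem.Set Int)) (alive : List Bool) (perm : List Int),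
      pvInv n G adj radj alive → pvQInv n adj alive pq →
      (pvAliveL n alive).length = toks.length →
      (toks.foldl (pvA_step n) (G, perm)).2
        = (toks.foldl (pvB_step n) (pq, adj, radj, alive, perm)).2.2.2.2 := by
  intro toks
  induction toks with
  | nil => intro G pq adj radj alive perm _ _ _; rfl
  | cons t toks ih =>
    intro G pq adj radj alive perm hI hQ hlen
    have hne : pvAliveL n alive ≠ [] := by
      intro h; rw [h] at hlen; simp at hlen
    obtain ⟨p, G', pq', adj', radj', alive', hA, hB, hI', hQ', hal', hp⟩ :=
      pv_step n G pq adj radj alive perm perm t hI hQ hne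
    rw [List.foldl_cons, List.foldl_cons, hA, hB]
    apply ih _ _ _ _ _ _ hI' hQ'
    rw [hal']
    have hnd := pv_alive_nodup n alive
    have hcount : (pvAliveL n alive).count p = 1 := List.count_eq_one_of_mem hnd hp
    have hlen' : (pvAliveL n alive).length = toks.length + 1 := by simpa using hlen
    have hsplit := List.length_eq_countP_add_countP (fun v => v == p) (l := pvAliveL n alive)
    have hflen : (List.filter (fun v => !(v == p)) (pvAliveL n alive)).length
        = List.countP (fun v => !(v == p)) (pvAliveL n alive) := by
      rw [List.countP_eq_length_filter]
    have hcp : List.countP (fun v => v == p) (pvAliveL n alive) = 1 := hcount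
    have : List.countP (fun v => decide ¬(v == p) = true) (pvAliveL n alive)
        = List.countP (fun v => !(v == p)) (pvAliveL n alive) := by
      apply List.countP_congr
      intro v _
      by_cases h : v = p <;> simp [h]
    omega

theorem pv_alive_replicate (N : Nat) :
    pvAliveL (N : Int) (List.replicate N true) = PySem.List.pyRange 0 (N : Int) 1 := by
  unfold pvAliveL
  apply List.filter_eq_self.mpr
  intro v hv
  obtain ⟨hv0, hvn⟩ := PySem.List.mem_pyRange_one.mp hv
  rw [PySem.List.pyGetD_eq_getElem _ _ hv0 (by simpa using hvn)]
  simp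

-- the initial queue (built by ordered inserts over range(n)) satisfies the queue invariant
theorem pv_qinit (N : Nat) (adjB : List (PySem.Set Int)) :
    pvQInv (N : Int) adjB (List.replicate N true)
      ((PySem.List.pyRange 0 (N : Int) 1).foldl
        (fun q v => pvInsert q (PySem.Set.len (PySem.List.pyGetD adjB v []), v)) []) := by
  refine ⟨?_, ?_, ?_⟩
  · exact pv_foldI_sorted (fun v => (PySem.Set.len (PySem.List.pyGetD adjB v []), v)) _ []
      List.Pairwise.nil
  · intro v hv
    rw [pv_alive_replicate N] at hv
    exact pv_foldI_mem (fun v => (PySem.Set.len (PySem.List.pyGetD adjB v []), v)) _ [] v hv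
  · intro e he
    rcases pv_foldI_src (fun v => (PySem.Set.len (PySem.List.pyGetD adjB v []), v)) _ [] e he
      with h | ⟨v, hv, rfl⟩
    · simp at h
    · exact PySem.List.mem_pyRange_one.mp hv

theorem pv_build_step (n : Int) (G : PySem.Dict Int (PySem.Set Int))
    (adj radj : List (PySem.Set Int)) (alive : List Bool)
    (hAll : pvAliveL n alive = PySem.List.pyRange 0 n 1)
    (hI : pvInv n G adj radj alive) (i j : Int)
    (hi : i ∈ PySem.List.pyRange 0 n 1) (hj : j ∈ PySem.List.pyRange 0 n 1) (hij : i ≠ j) :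
    pvInv n (G.insert i (PySem.Set.add (G.getD i []) j))
      (PySem.List.pySetD adj i (PySem.Set.add (PySem.List.pyGetD adj i []) j))
      (PySem.List.pySetD radj j (PySem.Set.add (PySem.List.pyGetD radj j []) i)) alive := by
  obtain ⟨hi0, hin⟩ := PySem.List.mem_pyRange_one.mp hi
  obtain ⟨hj0, hjn⟩ := PySem.List.mem_pyRange_one.mp hj
  obtain ⟨l⟩ := G
  have hl : l = (pvAliveL n alive).map (fun v => (v, pvCell adj v)) := hI.items
  subst hl
  have hiL : i ∈ pvAliveL n alive := by rw [hAll]; exact hi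
  have hjL : j ∈ pvAliveL n alive := by rw [hAll]; exact hj
  have hgetD : (PySem.Dict.mk ((pvAliveL n alive).map (fun v => (v, pvCell adj v)))).getD i []
      = pvCell adj i := by rw [pv_dict_getD, if_pos hiL]
  have hkeys : i ∈ ((pvAliveL n alive).map (fun v => (v, pvCell adj v))).map Prod.fst := by
    simpa [List.map_map, Function.comp_def] using hiL
  have hcell' : ∀ w : Int, 0 ≤ w → w < n →
      pvCell (PySem.List.pySetD adj i (PySem.Set.add (PySem.List.pyGetD adj i []) j)) w
        = if w = i then PySem.Set.add (pvCell adj i) j else pvCell adj w := by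
    intro w hw0 hwn
    exact pv_cell_set adj i _ hi0 w hw0 (by rw [hI.la]; exact hwn)
  have hrcell' : ∀ w : Int, 0 ≤ w → w < n →
      pvCell (PySem.List.pySetD radj j (PySem.Set.add (PySem.List.pyGetD radj j []) i)) w
        = if w = j then PySem.Set.add (pvCell radj j) i else pvCell radj w := by
    intro w hw0 hwn
    exact pv_cell_set radj j _ hj0 w hw0 (by rw [hI.lr]; exact hwn)
  have hpres : ∀ (v q : Int), 0 ≤ q → q < n → v ∈ pvCell radj q →
      v ∈ pvCell (PySem.List.pySetD radj j (PySem.Set.add (PySem.List.pyGetD radj j []) i)) q := by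
    intro v q hq0 hqn hv
    rw [hrcell' q hq0 hqn]
    by_cases hqj : q = j
    · subst hqj; rw [if_pos rfl]; exact (PySem.Set.mem_add _ _ _).mpr (Or.inl hv)
    · rw [if_neg hqj]; exact hv
  refine ⟨?_, ?_, hI.lv, ?_, ?_, ?_, ?_, ?_, ?_, ?_⟩
  · rw [PySem.List.length_pySetD]; exact hI.la
  · rw [PySem.List.length_pySetD]; exact hI.lr
  · -- items
    rw [hgetD, pv_insert_existing _ i _ hkeys, List.map_map]
    apply List.map_congr_left
    intro v hv
    obtain ⟨hv0, hvn⟩ := pv_alive_range n alive v hv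
    rw [Function.comp_def]
    simp only []
    rw [hcell' v hv0 hvn]
    by_cases hvi : v = i
    · simp [hvi]
    · simp [hvi]
  · -- nd
    intro v hv0 hvn
    rw [hcell' v hv0 hvn]
    by_cases hvi : v = i
    · rw [if_pos hvi]; exact pv_add_nodup _ _ (hI.nd i hi0 hin)
    · rw [if_neg hvi]; exact hI.nd v hv0 hvn
  · -- mem
    intro v hv w hw
    obtain ⟨hv0, hvn⟩ := pv_alive_range n alive v hv
    rw [hcell' v hv0 hvn] at hw
    by_cases hvi : v = i
    · rw [if_pos hvi] at hw
      rcases (PySem.Set.mem_add _ _ _).mp hw with hwo | hwj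
      · have := hI.mem i hiL w hwo
        exact ⟨this.1, hvi ▸ this.2⟩
      · refine ⟨hwj ▸ hjL, ?_⟩
        rw [hwj, hvi]
        exact Ne.symm hij
    · rw [if_neg hvi] at hw
      exact hI.mem v hv w hw
  · -- sup
    intro v hv q hq
    obtain ⟨hv0, hvn⟩ := pv_alive_range n alive v hv
    have hapres : ∀ (v' q' : Int), 0 ≤ q' → q' < n → v' ∈ pvCell adj q' →
        v' ∈ pvCell (PySem.List.pySetD adj i (PySem.Set.add (PySem.List.pyGetD adj i []) j)) q' := by
      intro v' q' hq0 hqn hv'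
      rw [hcell' q' hq0 hqn]
      by_cases hqi : q' = i
      · subst hqi; rw [if_pos rfl]; exact (PySem.Set.mem_add _ _ _).mpr (Or.inl hv')
      · rw [if_neg hqi]; exact hv'
    rw [hcell' v hv0 hvn] at hq
    by_cases hvi : v = i
    · rw [if_pos hvi] at hq
      rcases (PySem.Set.mem_add _ _ _).mp hq with hqo | hqj
      · obtain ⟨hq0, hqn⟩ := pv_alive_range n alive q (hI.mem i hiL q hqo).1
        rcases hI.sup i hiL q hqo with h | h
        · exact Or.inl (hvi ▸ hpres i q hq0 hqn h)
        · exact Or.inr (hvi ▸ hapres i q hq0 hqn h)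
      · refine Or.inl ?_
        rw [hqj, hrcell' j hj0 hjn, if_pos rfl]
        exact (PySem.Set.mem_add _ _ _).mpr (Or.inr hvi)
    · rw [if_neg hvi] at hq
      obtain ⟨hq0, hqn⟩ := pv_alive_range n alive q (hI.mem v hv q hq).1
      rcases hI.sup v hv q hq with h | h
      · exact Or.inl (hpres v q hq0 hqn h)
      · exact Or.inr (hapres v q hq0 hqn h)
  · -- rrange
    intro q hq0 hqn w hw
    rw [hrcell' q hq0 hqn] at hw
    by_cases hqj : q = j
    · rw [if_pos hqj] at hw
      rcases (PySem.Set.mem_add _ _ _).mp hw with hwo | hwi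
      · exact hI.rrange j hj0 hjn w hwo
      · exact hwi ▸ ⟨hi0, hin⟩
    · rw [if_neg hqj] at hw
      exact hI.rrange q hq0 hqn w hw
  · -- rnd
    intro q hq0 hqn
    rw [hrcell' q hq0 hqn]
    by_cases hqj : q = j
    · rw [if_pos hqj]; exact pv_add_nodup _ _ (hI.rnd j hj0 hjn)
    · rw [if_neg hqj]; exact hI.rnd q hq0 hqn
  · -- rirr
    intro q hq0 hqn
    rw [hrcell' q hq0 hqn]
    by_cases hqj : q = j
    · rw [if_pos hqj]
      intro hmem
      rcases (PySem.Set.mem_add _ _ _).mp hmem with h | h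
      · exact hI.rirr j hj0 hjn (hqj ▸ h)
      · exact hij (hqj ▸ h).symm
    · rw [if_neg hqj]; exact hI.rirr q hq0 hqn

theorem pv_build (matrix : List (List Int)) (_hpre : Pre_minimum_degree_permutation_py matrix) :
    ∃ G pq adj radj,
      (minimum_degree_permutation_py matrix
        = ((PySem.List.pyRange 0 (matrix.length : Int) 1).foldl (pvA_step (matrix.length : Int)) (G, [])).2) ∧
      (minimum_degree_permutation_py_alt matrix
        = ((PySem.List.pyRange 0 (matrix.length : Int) 1).foldl (pvB_step (matrix.length : Int))
            (pq, adj, radj, List.replicate matrix.length true, [])).2.2.2.2) ∧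
      pvInv (matrix.length : Int) G adj radj (List.replicate matrix.length true) ∧
      pvQInv (matrix.length : Int) adj (List.replicate matrix.length true) pq := by
  refine ⟨_, _, _, _, rfl, rfl, ?_, ?_⟩
  · have hAll : pvAliveL (matrix.length : Int) (List.replicate matrix.length true)
        = PySem.List.pyRange 0 (matrix.length : Int) 1 := pv_alive_replicate matrix.length
    have hbase : pvInv (matrix.length : Int)
        (PySem.Dict.ofList ((PySem.List.pyRange 0 (matrix.length : Int) 1).map (fun i => (i, PySem.Set.empty))))
        ((PySem.List.pyRange 0 (matrix.length : Int) 1).map (fun _ => PySem.Set.empty))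
        ((PySem.List.pyRange 0 (matrix.length : Int) 1).map (fun _ => PySem.Set.empty))
        (List.replicate matrix.length true) := by
      have hlen : ((PySem.List.pyRange 0 (matrix.length : Int) 1).map
          (fun _ => (PySem.Set.empty : PySem.Set Int))).length = matrix.length := by
        simp [PySem.List.length_pyRange_one]
      have hcell0 : ∀ w : Int, 0 ≤ w → w < (matrix.length : Int) →
          pvCell ((PySem.List.pyRange 0 (matrix.length : Int) 1).map (fun _ => PySem.Set.empty)) w
            = ([] : List Int) := by
        intro w hw0 hwn
        unfold pvCell
        rw [PySem.List.pyGetD_eq_getElem _ _ hw0 (by rw [hlen]; exact hwn)]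
        simp [PySem.Set.empty]
      have hG0 : (PySem.Dict.ofList ((PySem.List.pyRange 0 (matrix.length : Int) 1).map
          (fun i => (i, (PySem.Set.empty : PySem.Set Int))))).items
          = (PySem.List.pyRange 0 (matrix.length : Int) 1).map (fun i => (i, (PySem.Set.empty : PySem.Set Int))) := by
        unfold PySem.Dict.ofList
        rw [pv_update_fresh _ _ (fun k _ => rfl)
          (by simpa [List.map_map, Function.comp_def] using PySem.List.nodup_pyRange_one 0 (matrix.length : Int))]
        rfl
      refine ⟨by simp, by simp, by simp, ?_, ?_, ?_, ?_, ?_, ?_, ?_⟩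
      · rw [hG0, hAll]
        apply List.map_congr_left
        intro v hv
        obtain ⟨hv0, hvn⟩ := PySem.List.mem_pyRange_one.mp hv
        rw [hcell0 v hv0 hvn]
        rfl
      · intro v hv0 hvn; rw [hcell0 v hv0 hvn]; exact List.nodup_nil
      · intro v hv w hw
        obtain ⟨hv0, hvn⟩ := pv_alive_range _ _ v hv
        rw [hcell0 v hv0 hvn] at hw
        simp at hw
      · intro v hv q hq
        obtain ⟨hv0, hvn⟩ := pv_alive_range _ _ v hv
        rw [hcell0 v hv0 hvn] at hq
        simp at hq
      · intro q hq0 hqn w hw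
        rw [hcell0 q hq0 hqn] at hw
        simp at hw
      · intro q hq0 hqn; rw [hcell0 q hq0 hqn]; exact List.nodup_nil
      · intro q hq0 hqn; rw [hcell0 q hq0 hqn]; simp
    refine pv_foldl_rel
      (fun Gd (ar : List (PySem.Set Int) × List (PySem.Set Int)) =>
        pvInv (matrix.length : Int) Gd ar.1 ar.2 (List.replicate matrix.length true))
      _ _ (PySem.List.pyRange 0 (matrix.length : Int) 1) _ _ hbase ?_
    intro G ar i hi hR
    refine pv_foldl_rel
      (fun Gd (ar : List (PySem.Set Int) × List (PySem.Set Int)) =>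
        pvInv (matrix.length : Int) Gd ar.1 ar.2 (List.replicate matrix.length true))
      _ _ (PySem.List.pyRange 0 (matrix.length : Int) 1) _ _ hR ?_
    intro G' ar' j hj hR'
    by_cases hc : PySem.List.pyGetD (PySem.List.pyGetD matrix i []) j 0 ≠ 0 ∧ i ≠ j
    · rw [if_pos hc, if_pos hc]
      exact pv_build_step _ _ _ _ _ hAll hR' i j hi hj hc.2
    · rw [if_neg hc, if_neg hc]
      exact hR'
  · exact pv_qinit matrix.length _

-- ===== VERDICT (by name: the statement is the Claim_ definition above) =====
theorem minimum_degree_permutation_py_spec : Claim_equal_minimum_degree_permutation_py := by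
  intro matrix _ hpre
  unfold Spec_minimum_degree_permutation_py
  obtain ⟨G, pq, adj, radj, hA, hB, hI, hQ⟩ := pv_build matrix hpre
  rw [hA, hB]
  exact pv_main _ _ _ _ _ _ _ _ hI hQ (by rw [pv_alive_replicate])
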